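-- pv_equiv track=rewrite | github.com/kimgun95/my-study-log | 2022_Dev_Matching/하반기1/2.py | solution
-- ===== SOURCE A (Python) =====
-- from collections import deque
--
-- def solution(maps):
--     answer = {}
--     n, m = len(maps), len(maps[0])
--     visit = [[False for _ in range(m)] for _ in range(n)]
--     for i in range(n):
--         for j in range(m):
--             if maps[i][j] != '.':
--                 if maps[i][j] not in answer:
--                     answer[maps[i][j]] = 1
--                 else:
--                     answer[maps[i][j]] += 1
--     dir = [[1,0], [-1,0], [0,1], [0,-1]]
--
--     def bfs(y, x):
--         dq = deque([[y, x]])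
--         visit[y][x] = True
--         country = {}
--         country[maps[y][x]] = 1
--         while dq:
--             sy, sx = dq.popleft()
--             for dy, dx in dir:
--                 ny, nx = sy + dy, sx + dx
--                 if 0<=ny<n and 0<=nx<m and maps[ny][nx] != '.' and visit[ny][nx] is False:
--                     visit[ny][nx] = True
--                     dq.append([ny, nx])
--                     if maps[ny][nx] not in country:
--                         country[maps[ny][nx]] = 1
--                     else:
--                         country[maps[ny][nx]] += 1
--         return country
--
--     def war(co):
--         max_value = max(co.values())
--         max_alpha = ''
--         for c in co:
--             if co[c] == max_value and c >= max_alpha: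
--                 max_alpha = c
--         for c in co:
--             if co[c] < max_value and c != max_alpha:
--                 answer[max_alpha] += co[c]
--                 answer[c] -= co[c]
--
--     for i in range(n):
--         for j in range(m):
--             if maps[i][j] != '.' and visit[i][j] is False:
--                 c = bfs(i, j)
--                 war(c)
--
--     return max(answer.values())
-- ===== SOURCE B (Python) =====
-- from collections import Counter
--
-- def solution(maps):
--     n, m = len(maps), len(maps[0])
--
--     # union-find over non-'.' cells: union each cell with its right/down neighbour
--     parent = {}
--     for i in range(n):
--         for j in range(m):
--             if maps[i][j] != '.':
--                 parent[(i, j)] = (i, j)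
--
--     size = {p: 1 for p in parent}
--
--     def find(p):
--         while parent[p] != p:
--             p = parent[p]
--         return p
--
--     for (i, j) in list(parent):
--         for q in ((i + 1, j), (i, j + 1)):
--             if q in parent:
--                 rp, rq = find((i, j)), find(q)
--                 if rp != rq:
--                     if size[rp] < size[rq]:
--                         rp, rq = rq, rp
--                     parent[rq] = rp
--                     size[rp] += size[rq]
--
--     # group the letters of each component by its root, in one scan
--     comps = {}
--     for cell in parent:
--         comps.setdefault(find(cell), []).append(maps[cell[0]][cell[1]])
--
--     # global letter counts
--     ans = {}
--     for i in range(n):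
--         for j in range(m):
--             c = maps[i][j]
--             if c != '.':
--                 ans[c] = ans.get(c, 0) + 1
--
--     # the war: within each component the strongest letter absorbs the strictly weaker ones
--     for letters in comps.values():
--         cnt = Counter(letters)
--         top = max(cnt.values())
--         winner = max(c for c in cnt if cnt[c] == top)
--         for c, v in cnt.items():
--             if v < top:
--                 ans[winner] += v
--                 ans[c] -= v
--     return max(ans.values())
-- ===== Notes on version B (the rewrite author's own statement) =====
-- stated objective: alternative
-- what changed: B replaces A's per-seed BFS (deque + mutated visit matrix + in-place war() on the shared dict) by a union-by-size union-find over the non-'.' cells (union with right/down neighbours), a single group-by-root pass collecting each component's letters, and additive Counter-based war updates applied per component.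
import Mathlib
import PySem

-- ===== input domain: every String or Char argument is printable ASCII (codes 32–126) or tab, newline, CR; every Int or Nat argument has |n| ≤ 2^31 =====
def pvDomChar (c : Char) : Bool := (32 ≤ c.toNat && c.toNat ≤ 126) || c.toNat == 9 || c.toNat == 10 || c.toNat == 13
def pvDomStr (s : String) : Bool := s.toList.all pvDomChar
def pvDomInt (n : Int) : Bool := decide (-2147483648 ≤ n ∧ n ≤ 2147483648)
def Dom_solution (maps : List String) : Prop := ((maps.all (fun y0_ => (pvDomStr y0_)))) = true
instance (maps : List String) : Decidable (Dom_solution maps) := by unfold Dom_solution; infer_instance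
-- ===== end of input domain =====

-- B replaces A's per-seed queue BFS with in-place war() mutation by a union-find over the
-- non-'.' cells (union with right/down neighbours), one group-by-root pass collecting each
-- component's letters, and additive Counter-based war updates (objective: alternative).

-- shared grid-access helpers (pure indexing; Pre_solution keeps every access in range)
def pvRow (maps : List String) (i : Int) : List Char := ((PySem.List.pyGet? maps i).getD "").toList
def pvChar (maps : List String) (i j : Int) : Char := (PySem.List.pyGet? (pvRow maps i) j).getD '.'
def pvN (maps : List String) : Int := maps.length
def pvM (maps : List String) : Int := (pvRow maps 0).length

-- ===== PORT A =====
-- visit[y][x] read / write (indices are in range at every use admitted by Pre_solution)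
def vGet (visit : List (List Bool)) (y x : Int) : Bool :=
  (PySem.List.pyGet? ((PySem.List.pyGet? visit y).getD []) x).getD false
def vSet (visit : List (List Bool)) (y x : Int) (b : Bool) : List (List Bool) :=
  PySem.List.pySetD visit y (PySem.List.pySetD ((PySem.List.pyGet? visit y).getD []) x b)

def dirListA : List (Int × Int) := [(1, 0), (-1, 0), (0, 1), (0, -1)]

-- the body of A's `for dy, dx in dir:` loop, for one neighbour q
def bfsStepA (maps : List String)
    (st : List (Int × Int) × List (List Bool) × PySem.Dict Char Int) (q : Int × Int) :
    List (Int × Int) × List (List Bool) × PySem.Dict Char Int :=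
  if 0 ≤ q.1 ∧ q.1 < pvN maps ∧ 0 ≤ q.2 ∧ q.2 < pvM maps ∧ pvChar maps q.1 q.2 ≠ '.' ∧
      vGet st.2.1 q.1 q.2 = false then
    (st.1 ++ [q], vSet st.2.1 q.1 q.2 true,
      if st.2.2.contains (pvChar maps q.1 q.2) = false then
        st.2.2.insert (pvChar maps q.1 q.2) 1
      else
        st.2.2.insert (pvChar maps q.1 q.2) (st.2.2.getD (pvChar maps q.1 q.2) 0 + 1))
  else st

-- A's `while dq:` loop; the fuel only bounds the number of pops (each enqueue marks a fresh
-- cell visited, so n*m+1 pops can never be reached with a nonempty queue — fuel 0 is dead code)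
def bfsA (maps : List String) :
    Nat → List (Int × Int) → List (List Bool) → PySem.Dict Char Int →
    PySem.Dict Char Int × List (List Bool)
  | 0, _, visit, country => (country, visit)
  | _ + 1, [], visit, country => (country, visit)
  | fuel + 1, p :: rest, visit, country =>
      let st := dirListA.foldl (fun st d => bfsStepA maps st (p.1 + d.1, p.2 + d.2))
        (rest, visit, country)
      bfsA maps fuel st.1 st.2.1 st.2.2

-- A's `war(co)`: max_alpha = '' is modelled as `none` (every 1-char string is ≥ '', and
-- comparison of 1-char strings is Char comparison); the `.getD ' '` default is dead code
-- since co is nonempty, so some key attains the maximum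
def warA (answer co : PySem.Dict Char Int) : PySem.Dict Char Int :=
  let maxValue : Int := (PySem.List.max? co.values (fun v => v)).getD 0
  let maxAlpha : Option Char := co.keys.foldl (fun ma c =>
    if co.getD c 0 = maxValue ∧ ma.all (fun a => decide (a ≤ c)) = true then some c else ma) none
  let w : Char := maxAlpha.getD ' '
  co.keys.foldl (fun ans c =>
    if co.getD c 0 < maxValue ∧ some c ≠ maxAlpha then
      let ans1 := ans.insert w (ans.getD w 0 + co.getD c 0)
      ans1.insert c (ans1.getD c 0 - co.getD c 0)
    else ans) answer

def solution (maps : List String) : Int :=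
  let n := pvN maps
  let m := pvM maps
  let visit0 : List (List Bool) := List.replicate n.toNat (List.replicate m.toNat false)
  let answer0 : PySem.Dict Char Int :=
    (PySem.List.pyRange 0 n 1).foldl (fun ans i =>
      (PySem.List.pyRange 0 m 1).foldl (fun ans j =>
        if pvChar maps i j ≠ '.' then
          if ans.contains (pvChar maps i j) = false then ans.insert (pvChar maps i j) 1
          else ans.insert (pvChar maps i j) (ans.getD (pvChar maps i j) 0 + 1)
        else ans) ans) PySem.Dict.empty
  let fin := (PySem.List.pyRange 0 n 1).foldl (fun st i =>
      (PySem.List.pyRange 0 m 1).foldl (fun st j =>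
        if pvChar maps i j ≠ '.' ∧ vGet st.2 i j = false then
          let visit1 := vSet st.2 i j true
          let r := bfsA maps (n.toNat * m.toNat + 1) [(i, j)] visit1
            (PySem.Dict.empty.insert (pvChar maps i j) 1)
          (warA st.1 r.1, r.2)
        else st) st) (answer0, visit0)
  (PySem.List.max? fin.1.values (fun v => v)).getD 0

-- ===== PORT B =====
-- fuel for find's while loop: parent chains grow by at most one per union and there are at
-- most 2·n·m unions, so a chain is always shorter than the fuel — fuel exhaustion is dead code
def ufFuel (maps : List String) : Nat := 2 * ((pvN maps).toNat * (pvM maps).toNat) + 2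

-- Source B's `find`: follow parent pointers until a fixpoint
def ufFind (par : PySem.Dict (Int × Int) (Int × Int)) : Nat → (Int × Int) → (Int × Int)
  | 0, p => p
  | fuel + 1, p => if par.getD p p = p then p else ufFind par fuel (par.getD p p)

-- Source B builds parent, then unions neighbours, then groups, then seeds, then wars; each
-- assignment of Source B is one helper def here
def altParent0 (maps : List String) : PySem.Dict (Int × Int) (Int × Int) :=
  (PySem.List.pyRange 0 (pvN maps) 1).foldl (fun par i =>
    (PySem.List.pyRange 0 (pvM maps) 1).foldl (fun par j =>
      if pvChar maps i j ≠ '.' then par.insert (i, j) (i, j) else par) par) PySem.Dict.empty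

def altSize0 (maps : List String) : PySem.Dict (Int × Int) Int :=
  (altParent0 maps).keys.foldl (fun sz p => sz.insert p 1) PySem.Dict.empty

-- the union loop mutates both `parent` and `size`; the state is the pair of dicts
def altUF (maps : List String) :
    PySem.Dict (Int × Int) (Int × Int) × PySem.Dict (Int × Int) Int :=
  (altParent0 maps).keys.foldl (fun st p =>
    [(p.1 + 1, p.2), (p.1, p.2 + 1)].foldl (fun st q =>
      if st.1.contains q then
        let rp := ufFind st.1 (ufFuel maps) p
        let rq := ufFind st.1 (ufFuel maps) q
        if rp ≠ rq then
          if st.2.getD rp 0 < st.2.getD rq 0 then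
            (st.1.insert rp rq, st.2.insert rq (st.2.getD rq 0 + st.2.getD rp 0))
          else
            (st.1.insert rq rp, st.2.insert rp (st.2.getD rp 0 + st.2.getD rq 0))
        else st
      else st) st) (altParent0 maps, altSize0 maps)

def altParent (maps : List String) : PySem.Dict (Int × Int) (Int × Int) :=
  (altUF maps).1

def altComps (maps : List String) : PySem.Dict (Int × Int) (List Char) :=
  (altParent maps).keys.foldl (fun co cell =>
    let r := ufFind (altParent maps) (ufFuel maps) cell
    co.insert r (co.getD r [] ++ [pvChar maps cell.1 cell.2])) PySem.Dict.empty

def altAns0 (maps : List String) : PySem.Dict Char Int :=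
  (PySem.List.pyRange 0 (pvN maps) 1).foldl (fun ans i =>
    (PySem.List.pyRange 0 (pvM maps) 1).foldl (fun ans j =>
      if pvChar maps i j ≠ '.' then
        ans.insert (pvChar maps i j) (ans.getD (pvChar maps i j) 0 + 1)
      else ans) ans) PySem.Dict.empty

def solution_alt (maps : List String) : Int :=
  let fin := (altComps maps).values.foldl (fun ans letters =>
      let cnt : PySem.Dict Char Int := PySem.Dict.counter letters
      let top : Int := (PySem.List.max? cnt.values (fun v => v)).getD 0
      let winner : Char :=
        (PySem.List.max? (cnt.keys.filter (fun c => cnt.getD c 0 == top)) (fun c => c)).getD ' '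
      cnt.items.foldl (fun a cv =>
        if cv.2 < top then
          let a1 := a.insert winner (a.getD winner 0 + cv.2)
          a1.insert cv.1 (a1.getD cv.1 0 - cv.2)
        else a) ans) (altAns0 maps)
  (PySem.List.max? fin.values (fun v => v)).getD 0

-- ===== PRECONDITION & SPEC =====
-- Pre_solution is exactly where the Python A returns: maps nonempty (else maps[0] raises
-- IndexError), every row at least as long as row 0 (else maps[i][j] raises IndexError),
-- and some cell of the scanned n×m rectangle non-'.' (else max() of an empty dict raises
-- ValueError).
def Pre_solution (maps : List String) : Prop :=
  maps ≠ [] ∧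
  (maps.all (fun s => decide (PySem.Str.len (maps.headD "") ≤ PySem.Str.len s)) = true) ∧
  (maps.any (fun s =>
    (s.toList.take (PySem.Str.len (maps.headD "")).toNat).any (fun c => c != '.')) = true)
instance (maps : List String) : Decidable (Pre_solution maps) := by
  unfold Pre_solution; infer_instance

def pvWitness_solution : List String := ["A"]

def Spec_solution (maps : List String) (out : Int) : Prop := out = solution_alt maps
instance (maps : List String) (out : Int) : Decidable (Spec_solution maps out) := by
  unfold Spec_solution; infer_instance

-- ===== CLAIM (what is proved, stated in full; the proofs are below) =====
def Claim_equal_solution : Prop :=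
  ∀ (maps : List String), Dom_solution maps → Pre_solution maps →
    Spec_solution maps (solution maps)

-- ===== LEMMAS AND PROOFS =====


-- ============ proof layer: grid basics ============

def okb (maps : List String) (p : Int × Int) : Bool :=
  decide (0 ≤ p.1 ∧ p.1 < pvN maps ∧ 0 ≤ p.2 ∧ p.2 < pvM maps ∧ pvChar maps p.1 p.2 ≠ '.')

def okCells (maps : List String) : Finset (Int × Int) :=
  ((Finset.range (pvN maps).toNat ×ˢ Finset.range (pvM maps).toNat).image
    (fun ij => ((ij.1 : Int), (ij.2 : Int)))).filter (fun p => okb maps p = true)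

lemma mem_okCells {maps : List String} {p : Int × Int} :
    p ∈ okCells maps ↔ okb maps p = true := by
  unfold okCells
  rw [Finset.mem_filter]
  simp only [Finset.mem_image, Finset.mem_product, Finset.mem_range]
  constructor
  · rintro ⟨-, h⟩; exact h
  · intro h
    refine ⟨⟨(p.1.toNat, p.2.toNat), ?_, ?_⟩, h⟩
    · simp only [okb, decide_eq_true_eq] at h; constructor <;> omega
    · simp only [okb, decide_eq_true_eq] at h
      rcases p with ⟨a, b⟩
      simp only [Prod.mk.injEq]
      constructor <;> omega

lemma card_okCells_le (maps : List String) :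
    (okCells maps).card ≤ (pvN maps).toNat * (pvM maps).toNat := by
  calc (okCells maps).card
      ≤ ((Finset.range (pvN maps).toNat ×ˢ Finset.range (pvM maps).toNat).image
          (fun ij => ((ij.1 : Int), (ij.2 : Int)))).card := Finset.card_filter_le _ _
    _ ≤ (Finset.range (pvN maps).toNat ×ˢ Finset.range (pvM maps).toNat).card :=
        Finset.card_image_le
    _ = (pvN maps).toNat * (pvM maps).toNat := by rw [Finset.card_product]; simp

def nbrsB (p : Int × Int) : List (Int × Int) :=
  [(p.1 + 1, p.2), (p.1 - 1, p.2), (p.1, p.2 + 1), (p.1, p.2 - 1)]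

lemma mem_nbrsB_symm {p q : Int × Int} : q ∈ nbrsB p ↔ p ∈ nbrsB q := by
  rcases p with ⟨a, b⟩; rcases q with ⟨c, d⟩
  simp only [nbrsB, List.mem_cons, List.not_mem_nil, or_false, Prod.mk.injEq]
  omega

def ClosedF (maps : List String) (T : Finset (Int × Int)) : Prop :=
  ∀ p ∈ T, ∀ q ∈ nbrsB p, okb maps q = true → q ∈ T

def ClosedRel (maps : List String) (V T : Finset (Int × Int)) : Prop :=
  ∀ p ∈ T, ∀ q ∈ nbrsB p, okb maps q = true → q ∉ V → q ∈ T

lemma closedF_union {maps : List String} {S T : Finset (Int × Int)}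
    (hS : ClosedF maps S) (hT : ClosedF maps T) : ClosedF maps (S ∪ T) := by
  intro p hp q hq hok
  rcases Finset.mem_union.mp hp with h | h
  · exact Finset.mem_union_left _ (hS p h q hq hok)
  · exact Finset.mem_union_right _ (hT p h q hq hok)

lemma closedRel_of_closedF {maps : List String} {V T : Finset (Int × Int)}
    (h : ClosedF maps T) : ClosedRel maps V T :=
  fun p hp q hq hok _ => h p hp q hq hok

-- ============ connectivity and components ============

def Adj (maps : List String) (p q : Int × Int) : Prop :=
  okb maps p = true ∧ okb maps q = true ∧ q ∈ nbrsB p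

def Conn (maps : List String) : (Int × Int) → (Int × Int) → Prop :=
  Relation.ReflTransGen (Adj maps)

lemma adj_symm {maps : List String} : Symmetric (Adj maps) := by
  intro p q h
  exact ⟨h.2.1, h.1, mem_nbrsB_symm.mp h.2.2⟩

lemma conn_symm {maps : List String} {p q : Int × Int} (h : Conn maps p q) : Conn maps q p :=
  Relation.ReflTransGen.symmetric adj_symm h

lemma conn_trans {maps : List String} {p q r : Int × Int}
    (h1 : Conn maps p q) (h2 : Conn maps q r) : Conn maps p r :=
  Relation.ReflTransGen.trans h1 h2

noncomputable def compF (maps : List String) (s : Int × Int) : Finset (Int × Int) :=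
  @Finset.filter _ (fun q => Conn maps s q) (Classical.decPred _) (okCells maps)

lemma mem_compF {maps : List String} {s q : Int × Int} :
    q ∈ compF maps s ↔ okb maps q = true ∧ Conn maps s q := by
  unfold compF
  rw [@Finset.mem_filter _ _ (Classical.decPred _), mem_okCells]

lemma self_mem_compF {maps : List String} {s : Int × Int} (h : okb maps s = true) :
    s ∈ compF maps s := mem_compF.mpr ⟨h, Relation.ReflTransGen.refl⟩

lemma compF_subset_ok {maps : List String} {s : Int × Int} :
    compF maps s ⊆ okCells maps :=
  fun q hq => mem_okCells.mpr (mem_compF.mp hq).1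

lemma closedF_compF {maps : List String} {s : Int × Int} : ClosedF maps (compF maps s) := by
  intro p hp q hq hok
  obtain ⟨hpok, hconn⟩ := mem_compF.mp hp
  exact mem_compF.mpr ⟨hok, hconn.tail ⟨hpok, hok, hq⟩⟩

lemma compF_min {maps : List String} {s : Int × Int} {T : Finset (Int × Int)}
    (hs : s ∈ T) (hT : ClosedF maps T) : compF maps s ⊆ T := by
  intro q hq
  obtain ⟨-, hconn⟩ := mem_compF.mp hq
  clear hq
  induction hconn with
  | refl => exact hs
  | tail h1 h2 ih => exact hT _ ih _ h2.2.2 h2.2.1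

lemma compF_disjoint {maps : List String} {s : Int × Int} {U : Finset (Int × Int)}
    (hU : ClosedF maps U) (hs : s ∉ U) :
    ∀ q ∈ compF maps s, q ∉ U := by
  intro q hq
  obtain ⟨-, hconn⟩ := mem_compF.mp hq
  clear hq
  induction hconn with
  | refl => exact hs
  | tail h1 h2 ih =>
      intro hc
      exact ih (hU _ hc _ (mem_nbrsB_symm.mp h2.2.2) h2.1)

-- ============ the visit matrix ============

def Shape (maps : List String) (visit : List (List Bool)) : Prop :=
  visit.length = (pvN maps).toNat ∧ ∀ r ∈ visit, r.length = (pvM maps).toNat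

def VRel (maps : List String) (visit : List (List Bool)) (W : Finset (Int × Int)) : Prop :=
  ∀ p : Int × Int, okb maps p = true → (vGet visit p.1 p.2 = true ↔ p ∈ W)

lemma vGet_replicate (n m : Nat) (y x : Int) :
    vGet (List.replicate n (List.replicate m false)) y x = false := by
  unfold vGet
  cases h : PySem.List.pyGet? (List.replicate n (List.replicate m false)) y with
  | none =>
      simp only [Option.getD_none]
      cases h3 : PySem.List.pyGet? ([] : List Bool) x with
      | none => rfl
      | some b => exact absurd (PySem.List.mem_of_pyGet?_eq_some _ h3) (List.not_mem_nil)
  | some r =>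
      have hr := PySem.List.mem_of_pyGet?_eq_some _ h
      rw [List.eq_of_mem_replicate hr]
      simp only [Option.getD_some]
      cases h2 : PySem.List.pyGet? (List.replicate m false) x with
      | none => rfl
      | some b =>
          have hb := PySem.List.mem_of_pyGet?_eq_some _ h2
          rw [List.eq_of_mem_replicate hb]
          rfl

lemma shape_visit0 (maps : List String) :
    Shape maps (List.replicate (pvN maps).toNat (List.replicate (pvM maps).toNat false)) := by
  constructor
  · simp
  · intro r hr; rw [List.eq_of_mem_replicate hr]; simp

lemma vrel_visit0 (maps : List String) :
    VRel maps (List.replicate (pvN maps).toNat (List.replicate (pvM maps).toNat false)) ∅ := by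
  intro p _
  simp [vGet_replicate]

lemma vSet_eq {visit : List (List Bool)} {y x : Int} (hy : 0 ≤ y) (b : Bool) :
    vSet visit y x b =
      visit.set y.toNat (PySem.List.pySetD ((PySem.List.pyGet? visit y).getD []) x b) := by
  unfold vSet
  exact PySem.List.pySetD_of_nonneg _ _ hy

lemma shape_vSet {maps : List String} {visit : List (List Bool)} (h : Shape maps visit)
    {y x : Int} (hy : 0 ≤ y ∧ y < pvN maps) (hx : 0 ≤ x ∧ x < pvM maps) (b : Bool) :
    Shape maps (vSet visit y x b) := by
  obtain ⟨hl, hr⟩ := h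
  have hylen : y.toNat < visit.length := by omega
  have hget : PySem.List.pyGet? visit y = some visit[y.toNat] := by
    rw [PySem.List.pyGet?_of_nonneg _ hy.1]
    exact List.getElem?_eq_some_iff.mpr ⟨hylen, rfl⟩
  have hrowmem : visit[y.toNat] ∈ visit := List.getElem_mem hylen
  rw [vSet_eq hy.1, hget]
  simp only [Option.getD_some]
  constructor
  · simp [hl]
  · intro r hrm
    rcases List.mem_or_eq_of_mem_set hrm with h' | h'
    · exact hr r h'
    · subst h'
      rw [PySem.List.pySetD_of_nonneg _ _ hx.1, List.length_set]
      exact hr _ hrowmem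

lemma vGet_vSet {maps : List String} {visit : List (List Bool)} (hSh : Shape maps visit)
    {y x y' x' : Int} (hy : 0 ≤ y ∧ y < pvN maps) (hx : 0 ≤ x ∧ x < pvM maps)
    (hy' : 0 ≤ y' ∧ y' < pvN maps) (hx' : 0 ≤ x' ∧ x' < pvM maps) (b : Bool) :
    vGet (vSet visit y x b) y' x' = if y' = y ∧ x' = x then b else vGet visit y' x' := by
  obtain ⟨hl, hr⟩ := hSh
  have hylen : y.toNat < visit.length := by omega
  have hget : PySem.List.pyGet? visit y = some visit[y.toNat] := by
    rw [PySem.List.pyGet?_of_nonneg _ hy.1]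
    exact List.getElem?_eq_some_iff.mpr ⟨hylen, rfl⟩
  have hrowmem : visit[y.toNat] ∈ visit := List.getElem_mem hylen
  have hrowlen : visit[y.toNat].length = (pvM maps).toNat := hr _ hrowmem
  have hxlen : x.toNat < visit[y.toNat].length := by omega
  rw [vSet_eq hy.1, hget]
  simp only [Option.getD_some]
  rw [PySem.List.pySetD_of_nonneg _ _ hx.1]
  unfold vGet
  rw [PySem.List.pyGet?_of_nonneg _ hy'.1]
  rw [List.getElem?_set]
  by_cases hyy : y.toNat = y'.toNat
  · have hyy' : y' = y := by omega
    rw [if_pos hyy, if_pos hylen]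
    simp only [Option.getD_some]
    rw [PySem.List.pyGet?_of_nonneg _ hx'.1, PySem.List.pyGet?_of_nonneg _ hx'.1]
    rw [List.getElem?_set]
    subst hyy'
    rw [PySem.List.pyGet?_of_nonneg _ hy'.1] at hget ⊢
    by_cases hxx : x.toNat = x'.toNat
    · have hxx' : x' = x := by omega
      rw [if_pos hxx, if_pos hxlen, if_pos ⟨rfl, hxx'⟩]
      rfl
    · have hne : ¬ (y' = y' ∧ x' = x) := by rintro ⟨-, h⟩; omega
      rw [if_neg hxx, if_neg hne, hget]
      rfl
  · have hyy' : ¬ (y' = y ∧ x' = x) := by rintro ⟨h, -⟩; omega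
    rw [if_neg hyy, if_neg hyy']
    rw [PySem.List.pyGet?_of_nonneg _ hy'.1]


-- ============ A-side: the queue BFS computes the component ============

lemma country_update_eq (d : PySem.Dict Char Int) (c : Char) :
    (if d.contains c = false then d.insert c 1 else d.insert c (d.getD c 0 + 1)) =
      d.insert c (d.getD c 0 + 1) := by
  by_cases h : d.contains c = false
  · rw [if_pos h, PySem.Dict.getD_of_not_contains d 0 h, zero_add]
  · rw [if_neg h]

lemma okb_bounds {maps : List String} {q : Int × Int} (h : okb maps q = true) :
    (0 ≤ q.1 ∧ q.1 < pvN maps) ∧ (0 ≤ q.2 ∧ q.2 < pvM maps) := by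
  simp only [okb, decide_eq_true_eq] at h
  exact ⟨⟨h.1, h.2.1⟩, h.2.2.1, h.2.2.2.1⟩

lemma bfsStepA_pos {maps : List String} {dq : List (Int × Int)} {visit : List (List Bool)}
    {country : PySem.Dict Char Int} {q : Int × Int}
    (hok : okb maps q = true) (hv : vGet visit q.1 q.2 = false) :
    bfsStepA maps (dq, visit, country) q =
      (dq ++ [q], vSet visit q.1 q.2 true,
        country.insert (pvChar maps q.1 q.2) (country.getD (pvChar maps q.1 q.2) 0 + 1)) := by
  simp only [okb, decide_eq_true_eq] at hok
  unfold bfsStepA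
  rw [if_pos ⟨hok.1, hok.2.1, hok.2.2.1, hok.2.2.2.1, hok.2.2.2.2, hv⟩]
  simp only
  rw [country_update_eq]

lemma bfsStepA_neg {maps : List String} {st : List (Int × Int) × List (List Bool) × PySem.Dict Char Int}
    {q : Int × Int} (h : ¬ (okb maps q = true ∧ vGet st.2.1 q.1 q.2 = false)) :
    bfsStepA maps st q = st := by
  unfold bfsStepA
  rw [if_neg]
  intro hc
  apply h
  constructor
  · simp only [okb, decide_eq_true_eq]
    exact ⟨hc.1, hc.2.1, hc.2.2.1, hc.2.2.2.1, hc.2.2.2.2.1⟩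
  · exact hc.2.2.2.2.2

-- the invariant carried through A's BFS
def PackA (maps : List String) (V C : Finset (Int × Int)) (s : Int × Int)
    (dq : List (Int × Int)) (visit : List (List Bool)) (country : PySem.Dict Char Int)
    (W : Finset (Int × Int)) : Prop :=
  VRel maps visit W ∧ Shape maps visit ∧ s ∈ W ∧ V ⊆ W ∧ W ⊆ V ∪ C ∧ W ⊆ okCells maps ∧
  (∀ p ∈ dq, p ∈ W ∧ p ∈ C) ∧
  country.keys.Nodup ∧
  (∀ c, c ∈ country.keys ↔ ∃ p ∈ W \ V, pvChar maps p.1 p.2 = c) ∧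
  (∀ c, country.getD c 0 = (((W \ V).filter (fun p => pvChar maps p.1 p.2 = c)).card : Int))

lemma bfsStepA_fold {maps : List String} {V C : Finset (Int × Int)} {s : Int × Int}
    (hC : ClosedRel maps V C) (p : Int × Int) (hpC : p ∈ C) :
    ∀ (qs : List (Int × Int)) (dq : List (Int × Int)) (visit : List (List Bool))
      (country : PySem.Dict Char Int) (W : Finset (Int × Int)),
    (∀ q ∈ qs, q ∈ nbrsB p) →
    PackA maps V C s dq visit country W →
    (∀ p' ∈ W, p' ∉ dq → ∀ q ∈ nbrsB p', okb maps q = true → (q ∈ W ∨ (p' = p ∧ q ∈ qs))) →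
    ∃ W' : Finset (Int × Int), W ⊆ W' ∧
      PackA maps V C s (qs.foldl (bfsStepA maps) (dq, visit, country)).1
        (qs.foldl (bfsStepA maps) (dq, visit, country)).2.1
        (qs.foldl (bfsStepA maps) (dq, visit, country)).2.2 W' ∧
      (∀ p' ∈ W', p' ∉ (qs.foldl (bfsStepA maps) (dq, visit, country)).1 →
        ∀ q ∈ nbrsB p', okb maps q = true →
          (q ∈ W' ∨ (p' = p ∧ q ∈ ([] : List (Int × Int))))) ∧
      (qs.foldl (bfsStepA maps) (dq, visit, country)).1.length +
          ((okCells maps).card - W'.card) ≤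
        dq.length + ((okCells maps).card - W.card) := by
  intro qs
  induction qs with
  | nil =>
      intro dq visit country W _ hpack hsemi
      refine ⟨W, Finset.Subset.refl W, hpack, ?_, le_refl _⟩
      intro p' hp' hpd q hq hqok
      rcases hsemi p' hp' hpd q hq hqok with h | ⟨h1, h2⟩
      · exact Or.inl h
      · exact absurd h2 (List.not_mem_nil)
  | cons e qs ih =>
      intro dq visit country W hqs hpack hsemi
      obtain ⟨hVR, hSh, hsW, hVW, hWVC, hWok, hdq, hknd, hkeys, hcnt⟩ := hpack
      have henb : e ∈ nbrsB p := hqs e List.mem_cons_self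
      by_cases hc : okb maps e = true ∧ vGet visit e.1 e.2 = false
      · -- e is newly visited
        have heW : e ∉ W := by
          intro hmem
          have := (hVR e hc.1).mpr hmem
          rw [hc.2] at this
          exact Bool.false_ne_true this
        have heV : e ∉ V := fun h => heW (hVW h)
        have heC : e ∈ C := hC p hpC e henb hc.1 heV
        have hstep := bfsStepA_pos (dq := dq) (visit := visit) (country := country) hc.1 hc.2
        simp only [List.foldl_cons, hstep]
        have hbe := okb_bounds hc.1
        have hpack' : PackA maps V C s (dq ++ [e]) (vSet visit e.1 e.2 true)
            (country.insert (pvChar maps e.1 e.2) (country.getD (pvChar maps e.1 e.2) 0 + 1))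
            (insert e W) := by
          refine ⟨?_, shape_vSet hSh hbe.1 hbe.2 true, Finset.mem_insert_of_mem hsW,
            fun a ha => Finset.mem_insert_of_mem (hVW ha), ?_, ?_, ?_, ?_, ?_, ?_⟩
          · intro p' hp'ok
            have hbp' := okb_bounds hp'ok
            rw [vGet_vSet hSh hbe.1 hbe.2 hbp'.1 hbp'.2 true]
            by_cases hpe : p'.1 = e.1 ∧ p'.2 = e.2
            · have : p' = e := Prod.ext hpe.1 hpe.2
              subst this
              rw [if_pos hpe]
              simp
            · rw [if_neg hpe]
              have hne : p' ≠ e := by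
                intro h; subst h; exact hpe ⟨rfl, rfl⟩
              rw [hVR p' hp'ok]
              constructor
              · exact fun h => Finset.mem_insert_of_mem h
              · intro h
                rcases Finset.mem_insert.mp h with h | h
                · exact absurd h hne
                · exact h
          · intro a ha
            rcases Finset.mem_insert.mp ha with h | h
            · subst h; exact Finset.mem_union_right _ heC
            · exact hWVC h
          · intro a ha
            rcases Finset.mem_insert.mp ha with h | h
            · subst h; exact mem_okCells.mpr hc.1
            · exact hWok h
          · intro a ha
            rcases List.mem_append.mp ha with h | h
            · have := hdq a h
              exact ⟨Finset.mem_insert_of_mem this.1, this.2⟩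
            · rw [List.mem_singleton] at h; subst h
              exact ⟨Finset.mem_insert_self _ _, heC⟩
          · exact PySem.Dict.nodup_keys_insert _ _ _ hknd
          · intro c
            rw [PySem.Dict.mem_keys_insert]
            have hins : insert e W \ V = insert e (W \ V) := by
              rw [Finset.insert_sdiff_of_notMem _ heV]
            rw [hins]
            constructor
            · rintro (h | h)
              · subst h; exact ⟨e, Finset.mem_insert_self _ _, rfl⟩
              · obtain ⟨a, ha, hac⟩ := (hkeys c).mp h
                exact ⟨a, Finset.mem_insert_of_mem ha, hac⟩
            · rintro ⟨a, ha, hac⟩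
              rcases Finset.mem_insert.mp ha with h | h
              · subst h; exact Or.inl hac.symm
              · exact Or.inr ((hkeys c).mpr ⟨a, h, hac⟩)
          · intro c
            have heWV : e ∉ W \ V := fun h => heW (Finset.mem_sdiff.mp h).1
            have hins : insert e W \ V = insert e (W \ V) := by
              rw [Finset.insert_sdiff_of_notMem _ heV]
            rw [PySem.Dict.getD_insert, hins, Finset.filter_insert]
            by_cases hce : c = pvChar maps e.1 e.2
            · rw [if_pos hce, if_pos hce.symm,
                Finset.card_insert_of_notMem (fun h => heWV (Finset.mem_filter.mp h).1)]
              rw [← hce, hcnt c]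
              push_cast
              ring
            · rw [if_neg hce, if_neg (fun h => hce h.symm)]
              exact hcnt c
        have hmeas : (dq ++ [e]).length + ((okCells maps).card - (insert e W).card) ≤
            dq.length + ((okCells maps).card - W.card) := by
          rw [List.length_append, List.length_singleton,
            Finset.card_insert_of_notMem heW]
          have hlt : W.card < (okCells maps).card :=
            Finset.card_lt_card (Finset.ssubset_iff_of_subset hWok |>.mpr
              ⟨e, mem_okCells.mpr hc.1, heW⟩)
          omega
        have hsemi' : ∀ p' ∈ insert e W, p' ∉ dq ++ [e] → ∀ q ∈ nbrsB p',
            okb maps q = true → (q ∈ insert e W ∨ (p' = p ∧ q ∈ qs)) := by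
          intro p' hp' hpd q hq hqok
          have hpne : p' ≠ e := by
            intro h; subst h
            exact hpd (List.mem_append.mpr (Or.inr (List.mem_singleton.mpr rfl)))
          have hp'W : p' ∈ W := by
            rcases Finset.mem_insert.mp hp' with h | h
            · exact absurd h hpne
            · exact h
          have hpd' : p' ∉ dq := fun h => hpd (List.mem_append.mpr (Or.inl h))
          rcases hsemi p' hp'W hpd' q hq hqok with h | ⟨h1, h2⟩
          · exact Or.inl (Finset.mem_insert_of_mem h)
          · rcases List.mem_cons.mp h2 with h | h
            · subst h; exact Or.inl (Finset.mem_insert_self _ _)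
            · exact Or.inr ⟨h1, h⟩
        obtain ⟨W', hWW', hpack'', hsemi'', hmeas'⟩ := ih (dq ++ [e]) (vSet visit e.1 e.2 true)
          (country.insert (pvChar maps e.1 e.2) (country.getD (pvChar maps e.1 e.2) 0 + 1))
          (insert e W) (fun q hq => hqs q (List.mem_cons_of_mem _ hq)) hpack' hsemi'
        exact ⟨W', fun a ha => hWW' (Finset.mem_insert_of_mem ha), hpack'', hsemi'',
          le_trans hmeas' hmeas⟩
      · -- e is skipped
        have hstep : bfsStepA maps (dq, visit, country) e = (dq, visit, country) :=
          bfsStepA_neg hc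
        simp only [List.foldl_cons, hstep]
        have hsemi' : ∀ p' ∈ W, p' ∉ dq → ∀ q ∈ nbrsB p',
            okb maps q = true → (q ∈ W ∨ (p' = p ∧ q ∈ qs)) := by
          intro p' hp' hpd q hq hqok
          rcases hsemi p' hp' hpd q hq hqok with h | ⟨h1, h2⟩
          · exact Or.inl h
          · rcases List.mem_cons.mp h2 with h | h
            · subst h
              have hv : vGet visit q.1 q.2 ≠ false := by
                intro hv
                exact hc ⟨hqok, hv⟩
              have : vGet visit q.1 q.2 = true := by
                cases hvv : vGet visit q.1 q.2
                · exact absurd hvv hv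
                · rfl
              exact Or.inl (((hVR q hqok).mp this))
            · exact Or.inr ⟨h1, h⟩
        exact ih dq visit country W (fun q hq => hqs q (List.mem_cons_of_mem _ hq))
          ⟨hVR, hSh, hsW, hVW, hWVC, hWok, hdq, hknd, hkeys, hcnt⟩ hsemi'

lemma dirfold_eq (maps : List String) (p : Int × Int) (rest : List (Int × Int))
    (visit : List (List Bool)) (country : PySem.Dict Char Int) :
    dirListA.foldl (fun st d => bfsStepA maps st (p.1 + d.1, p.2 + d.2))
      (rest, visit, country) =
    (nbrsB p).foldl (bfsStepA maps) (rest, visit, country) := by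
  have h : nbrsB p = dirListA.map (fun d => (p.1 + d.1, p.2 + d.2)) := by
    simp [nbrsB, dirListA, sub_eq_add_neg]
  rw [h, List.foldl_map]

lemma bfsA_spec {maps : List String} {V C : Finset (Int × Int)} {s : Int × Int}
    (hC : ClosedRel maps V C)
    (hCV : ∀ p ∈ C, p ∉ V)
    (hCmin : ∀ T : Finset (Int × Int), s ∈ T → ClosedF maps T → C ⊆ T) :
    ∀ (fuel : Nat) (dq : List (Int × Int)) (visit : List (List Bool))
      (country : PySem.Dict Char Int) (W : Finset (Int × Int)),
    PackA maps V C s dq visit country W →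
    (∀ p' ∈ W, p' ∉ dq → ∀ q ∈ nbrsB p', okb maps q = true → q ∈ W) →
    dq.length + ((okCells maps).card - W.card) < fuel →
    VRel maps (bfsA maps fuel dq visit country).2 (V ∪ C) ∧
    Shape maps (bfsA maps fuel dq visit country).2 ∧
    (bfsA maps fuel dq visit country).1.keys.Nodup ∧
    (∀ c, c ∈ (bfsA maps fuel dq visit country).1.keys ↔
      ∃ p ∈ C, pvChar maps p.1 p.2 = c) ∧
    (∀ c, (bfsA maps fuel dq visit country).1.getD c 0 =
      ((C.filter (fun p => pvChar maps p.1 p.2 = c)).card : Int)) := by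
  intro fuel
  induction fuel with
  | zero =>
      intro dq visit country W _ _ hfuel
      omega
  | succ fuel ih =>
      intro dq visit country W hpack hsemi hfuel
      obtain ⟨hVR, hSh, hsW, hVW, hWVC, hWok, hdq, hknd, hkeys, hcnt⟩ := hpack
      cases dq with
      | nil =>
          have hWclosed : ClosedF maps W := by
            intro p' hp' q hq hqok
            exact hsemi p' hp' (List.not_mem_nil) q hq hqok
          have hCW : C ⊆ W := hCmin W hsW hWclosed
          have hWeq : W = V ∪ C := by
            apply Finset.Subset.antisymm hWVC
            intro a ha
            rcases Finset.mem_union.mp ha with h | h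
            · exact hVW h
            · exact hCW h
          have hWV : W \ V = C := by
            rw [hWeq]
            apply Finset.ext
            intro a
            rw [Finset.mem_sdiff, Finset.mem_union]
            constructor
            · rintro ⟨h | h, hv⟩
              · exact absurd h hv
              · exact h
            · intro h
              exact ⟨Or.inr h, hCV a h⟩
          show VRel maps visit (V ∪ C) ∧ Shape maps visit ∧ _
          rw [← hWeq, ← hWV]
          exact ⟨hVR, hSh, hknd, hkeys, hcnt⟩
      | cons p rest =>
          have hstep : bfsA maps (fuel + 1) (p :: rest) visit country =
              bfsA maps fuel ((nbrsB p).foldl (bfsStepA maps) (rest, visit, country)).1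
                ((nbrsB p).foldl (bfsStepA maps) (rest, visit, country)).2.1
                ((nbrsB p).foldl (bfsStepA maps) (rest, visit, country)).2.2 := by
            simp only [bfsA]
            rw [dirfold_eq]
          rw [hstep]
          have hpW : p ∈ W := (hdq p List.mem_cons_self).1
          have hpC : p ∈ C := (hdq p List.mem_cons_self).2
          have hsemi' : ∀ p' ∈ W, p' ∉ rest → ∀ q ∈ nbrsB p',
              okb maps q = true → (q ∈ W ∨ (p' = p ∧ q ∈ nbrsB p)) := by
            intro p' hp' hpr q hq hqok
            by_cases hpp : p' = p
            · exact Or.inr ⟨hpp, hpp ▸ hq⟩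
            · have : p' ∉ p :: rest := by
                intro h
                rcases List.mem_cons.mp h with h | h
                · exact hpp h
                · exact hpr h
              exact Or.inl (hsemi p' hp' this q hq hqok)
          obtain ⟨W', hWW', hpack', hsemi'', hmeas⟩ := bfsStepA_fold hC p hpC (nbrsB p)
            rest visit country W (fun q hq => hq)
            ⟨hVR, hSh, hsW, hVW, hWVC, hWok, fun a ha => hdq a (List.mem_cons_of_mem _ ha),
              hknd, hkeys, hcnt⟩ hsemi'
          have hsemifin : ∀ p' ∈ W',
              p' ∉ ((nbrsB p).foldl (bfsStepA maps) (rest, visit, country)).1 →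
              ∀ q ∈ nbrsB p', okb maps q = true → q ∈ W' := by
            intro p' hp' hpd q hq hqok
            rcases hsemi'' p' hp' hpd q hq hqok with h | ⟨-, h⟩
            · exact h
            · exact absurd h (List.not_mem_nil)
          exact ih _ _ _ W' hpack' hsemifin (by
            simp only [List.length_cons] at hfuel
            omega)

-- ============ extrema and the war update ============

lemma max?_id_congr (l1 l2 : List Int) (h : ∀ x, x ∈ l1 ↔ x ∈ l2) :
    PySem.List.max? l1 (fun v => v) = PySem.List.max? l2 (fun v => v) := by
  cases h1 : PySem.List.max? l1 (fun v => v) with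
  | none =>
      rw [PySem.List.max?_eq_none_iff] at h1
      cases h2 : PySem.List.max? l2 (fun v => v) with
      | none => rfl
      | some m2 =>
          have := PySem.List.max?_mem h2
          rw [← h] at this
          rw [h1] at this
          exact absurd this (List.not_mem_nil)
  | some m1 =>
      cases h2 : PySem.List.max? l2 (fun v => v) with
      | none =>
          rw [PySem.List.max?_eq_none_iff] at h2
          have := PySem.List.max?_mem h1
          rw [h] at this
          rw [h2] at this
          exact absurd this (List.not_mem_nil)
      | some m2 =>
          have hm1 := PySem.List.max?_mem h1
          have hm2 := PySem.List.max?_mem h2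
          have h12 := PySem.List.max?_isMax h1
          have h21 := PySem.List.max?_isMax h2
          have hA : m1 ≤ m2 := h21 m1 ((h m1).mp hm1)
          have hB : m2 ≤ m1 := h12 m2 ((h m2).mpr hm2)
          rw [le_antisymm hA hB]

-- A's running `max_alpha` loop
lemma foldMax_spec (g : Char → Int) (maxV : Int) :
    ∀ (l : List Char) (ma0 : Option Char),
    ((l.foldl (fun ma c =>
        if g c = maxV ∧ ma.all (fun a => decide (a ≤ c)) = true then some c else ma) ma0 = ma0) ∨
      (∃ w, l.foldl (fun ma c =>
        if g c = maxV ∧ ma.all (fun a => decide (a ≤ c)) = true then some c else ma) ma0 = some w ∧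
        w ∈ l ∧ g w = maxV)) ∧
    (∀ c ∈ l, g c = maxV → ∃ w, l.foldl (fun ma c =>
        if g c = maxV ∧ ma.all (fun a => decide (a ≤ c)) = true then some c else ma) ma0 = some w ∧
        c ≤ w) ∧
    (∀ a w, ma0 = some a → l.foldl (fun ma c =>
        if g c = maxV ∧ ma.all (fun a => decide (a ≤ c)) = true then some c else ma) ma0 = some w →
        a ≤ w) := by
  intro l
  induction l with
  | nil =>
      intro ma0
      refine ⟨Or.inl rfl, ?_, ?_⟩
      · intro c hc; exact absurd hc (List.not_mem_nil)
      · intro a w h1 h2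
        rw [h1] at h2
        injection h2 with h
        exact le_of_eq h
  | cons e l ih =>
      intro ma0
      simp only [List.foldl_cons]
      by_cases hc : g e = maxV ∧ ma0.all (fun a => decide (a ≤ e)) = true
      · rw [if_pos hc]
        obtain ⟨ha, hb, hcc⟩ := ih (some e)
        refine ⟨?_, ?_, ?_⟩
        · rcases ha with h | ⟨w, hw, hwl, hwm⟩
          · exact Or.inr ⟨e, h, List.mem_cons_self, hc.1⟩
          · exact Or.inr ⟨w, hw, List.mem_cons_of_mem _ hwl, hwm⟩
        · intro c hcl hcm
          rcases List.mem_cons.mp hcl with h | h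
          · subst h
            rcases ha with h | ⟨w, hw, -, -⟩
            · exact ⟨c, h, le_refl c⟩
            · exact ⟨w, hw, hcc c w rfl hw⟩
          · exact hb c h hcm
        · intro a w h1 h2
          subst h1
          have hae : a ≤ e := by
            have := hc.2
            simp only [Option.all_some, decide_eq_true_eq] at this
            exact this
          exact le_trans hae (hcc e w rfl h2)
      · rw [if_neg hc]
        obtain ⟨ha, hb, hcc⟩ := ih ma0
        refine ⟨?_, ?_, ?_⟩
        · rcases ha with h | ⟨w, hw, hwl, hwm⟩
          · exact Or.inl h
          · exact Or.inr ⟨w, hw, List.mem_cons_of_mem _ hwl, hwm⟩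
        · intro c hcl hcm
          rcases List.mem_cons.mp hcl with h | h
          · subst h
            have : ∃ a, ma0 = some a ∧ ¬ (a ≤ c) := by
              cases ma0 with
              | none => exact absurd ⟨hcm, rfl⟩ hc
              | some a =>
                  by_cases hac : a ≤ c
                  · refine absurd ⟨hcm, ?_⟩ hc
                    simp only [Option.all_some, decide_eq_true_eq]
                    exact hac
                  · exact ⟨a, rfl, hac⟩
            obtain ⟨a, ha0, hac⟩ := this
            have hca : c ≤ a := le_of_not_ge hac
            rcases ha with h | ⟨w, hw, hwl, hwm⟩
            · exact ⟨a, h.trans ha0, hca⟩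
            · exact ⟨w, hw, hca.trans (hcc a w ha0 hw)⟩
          · exact hb c h hcm
        · exact hcc

lemma dict_eq_of_keys_getD (d1 d2 : PySem.Dict Char Int) (h1 : d1.keys.Nodup)
    (hk : d1.keys = d2.keys) (hv : ∀ c, d1.getD c 0 = d2.getD c 0) : d1 = d2 := by
  apply PySem.Dict.ext
  rw [PySem.Dict.items_eq_map_keys d1 h1 0, PySem.Dict.items_eq_map_keys d2 (hk ▸ h1) 0, ← hk]
  exact List.map_congr_left (fun k _ => by rw [hv k])

lemma warFold_spec (w : Char) (top : Int) (f : Char → Int) (hw : ¬ f w < top) :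
    ∀ (l : List Char) (d : PySem.Dict Char Int),
    d.keys.Nodup → (∀ c ∈ l, c ∈ d.keys) → w ∈ d.keys → l.Nodup →
    (l.foldl (fun ans c => if f c < top then
      (ans.insert w (ans.getD w 0 + f c)).insert c
        ((ans.insert w (ans.getD w 0 + f c)).getD c 0 - f c) else ans) d).keys = d.keys ∧
    (∀ x, (l.foldl (fun ans c => if f c < top then
      (ans.insert w (ans.getD w 0 + f c)).insert c
        ((ans.insert w (ans.getD w 0 + f c)).getD c 0 - f c) else ans) d).getD x 0 =
      d.getD x 0
      + (if x = w then ((l.filter (fun c => decide (f c < top))).map f).sum else 0)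
      - (if x ≠ w ∧ x ∈ l ∧ f x < top then f x else 0)) := by
  intro l
  induction l with
  | nil =>
      intro d hnd _ _ _
      refine ⟨rfl, ?_⟩
      intro x
      simp
  | cons c l ih =>
      intro d hnd hsub hwk hlnd
      simp only [List.foldl_cons]
      by_cases hfc : f c < top
      · have hcw : c ≠ w := by
          intro h; subst h; exact hw hfc
        have hck : c ∈ d.keys := hsub c List.mem_cons_self
        have hconW : d.contains w = true := (PySem.Dict.contains_iff_mem_keys d w).mpr hwk
        have hconC : ∀ v, (d.insert w v).contains c = true := by
          intro v
          rw [PySem.Dict.contains_insert]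
          rw [Bool.or_eq_true]
          exact Or.inr ((PySem.Dict.contains_iff_mem_keys d c).mpr hck)
        rw [if_pos hfc]
        set d' := (d.insert w (d.getD w 0 + f c)).insert c
          ((d.insert w (d.getD w 0 + f c)).getD c 0 - f c) with hd'
        have hkeys' : d'.keys = d.keys := by
          rw [hd', PySem.Dict.keys_insert_of_contains _ _ (hconC _),
            PySem.Dict.keys_insert_of_contains _ _ hconW]
        have hget' : ∀ x, d'.getD x 0 =
            if x = c then d.getD c 0 - f c else if x = w then d.getD w 0 + f c
            else d.getD x 0 := by
          intro x
          rw [hd', PySem.Dict.getD_insert]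
          by_cases hxc : x = c
          · rw [if_pos hxc, if_pos hxc, PySem.Dict.getD_insert, if_neg hcw]
          · rw [if_neg hxc, if_neg hxc, PySem.Dict.getD_insert]
        have hres := ih d' (by rw [hkeys']; exact hnd)
          (by intro a ha; rw [hkeys']; exact hsub a (List.mem_cons_of_mem _ ha))
          (by rw [hkeys']; exact hwk) hlnd.of_cons
        have hcnl : c ∉ l := (List.nodup_cons.mp hlnd).1
        refine ⟨by rw [hres.1, hkeys'], ?_⟩
        intro x
        rw [hres.2 x, hget' x]
        rw [List.filter_cons_of_pos (by simp [hfc]), List.map_cons, List.sum_cons]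
        by_cases hxc : x = c
        · have hxw : x ≠ w := by rw [hxc]; exact hcw
          have hnotl : ¬ (x ≠ w ∧ x ∈ l ∧ f x < top) := by
            rintro ⟨-, h, -⟩; rw [hxc] at h; exact hcnl h
          have hmem : x ≠ w ∧ x ∈ c :: l ∧ f x < top := by
            refine ⟨hxw, ?_, ?_⟩
            · rw [hxc]; exact List.mem_cons_self
            · rw [hxc]; exact hfc
          rw [if_pos hxc, if_neg hxw, if_neg hnotl, if_pos hmem, if_neg hxw, hxc]
          ring
        · by_cases hxw : x = w
          · have hne1 : ¬ (x ≠ w ∧ x ∈ l ∧ f x < top) := by rintro ⟨h, -, -⟩; exact h hxw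
            have hne2 : ¬ (x ≠ w ∧ x ∈ c :: l ∧ f x < top) := by rintro ⟨h, -, -⟩; exact h hxw
            rw [if_neg hxc, if_pos hxw, if_pos hxw, if_neg hne1, if_pos hxw, if_neg hne2, hxw]
            ring
          · rw [if_neg hxc, if_neg hxw, if_neg hxw, if_neg hxw]
            by_cases hm : x ∈ l ∧ f x < top
            · rw [if_pos ⟨hxw, hm.1, hm.2⟩, if_pos ⟨hxw, List.mem_cons_of_mem _ hm.1, hm.2⟩]
            · rw [if_neg (by rintro ⟨-, h1, h2⟩; exact hm ⟨h1, h2⟩),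
                if_neg (by rintro ⟨-, h1, h2⟩; exact hm ⟨(by
                  rcases List.mem_cons.mp h1 with h | h
                  · exact absurd h hxc
                  · exact h), h2⟩)]
      · rw [if_neg hfc]
        have hres := ih d hnd (fun a ha => hsub a (List.mem_cons_of_mem _ ha)) hwk hlnd.of_cons
        refine ⟨hres.1, ?_⟩
        intro x
        rw [hres.2 x]
        rw [List.filter_cons_of_neg (by simp [hfc])]
        congr 1
        by_cases hxc : x = c
        · subst hxc
          rw [if_neg (by rintro ⟨-, -, h⟩; exact hfc h),
            if_neg (by rintro ⟨-, -, h⟩; exact hfc h)]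
        · have : (x ≠ w ∧ x ∈ l ∧ f x < top) ↔ (x ≠ w ∧ x ∈ c :: l ∧ f x < top) := by
            constructor
            · rintro ⟨h1, h2, h3⟩; exact ⟨h1, List.mem_cons_of_mem _ h2, h3⟩
            · rintro ⟨h1, h2, h3⟩
              rcases List.mem_cons.mp h2 with h | h
              · exact absurd h hxc
              · exact ⟨h1, h, h3⟩
          by_cases hm : x ≠ w ∧ x ∈ l ∧ f x < top
          · rw [if_pos hm, if_pos (this.mp hm)]
          · rw [if_neg hm, if_neg (fun hc => hm (this.mpr hc))]

lemma war_eq (d co cnt : PySem.Dict Char Int) (top : Int) (winner : Char)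
    (hdnd : d.keys.Nodup)
    (hcond : co.keys.Nodup) (hcntnd : cnt.keys.Nodup)
    (hkeq : ∀ c, c ∈ co.keys ↔ c ∈ cnt.keys)
    (hveq : ∀ c, co.getD c 0 = cnt.getD c 0)
    (hne : co.keys ≠ [])
    (hsub : ∀ c ∈ co.keys, c ∈ d.keys)
    (htop : top = (PySem.List.max? cnt.values (fun v => v)).getD 0)
    (hwin : winner = (PySem.List.max? (cnt.keys.filter
      (fun c => cnt.getD c 0 == top)) (fun c => c)).getD ' ') :
    warA d co = cnt.items.foldl (fun a cv =>
      if cv.2 < top then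
        (a.insert winner (a.getD winner 0 + cv.2)).insert cv.1
          ((a.insert winner (a.getD winner 0 + cv.2)).getD cv.1 0 - cv.2)
      else a) d ∧ (warA d co).keys = d.keys := by
  have hvals_co : co.values = co.keys.map (fun k => co.getD k 0) :=
    PySem.Dict.values_eq_map_keys co hcond 0
  have hvals_cnt : cnt.values = cnt.keys.map (fun k => cnt.getD k 0) :=
    PySem.Dict.values_eq_map_keys cnt hcntnd 0
  have hmaxeq : PySem.List.max? co.values (fun v => v) =
      PySem.List.max? cnt.values (fun v => v) := by
    rw [hvals_co, hvals_cnt]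
    apply max?_id_congr
    intro x
    simp only [List.mem_map]
    constructor
    · rintro ⟨c, hc, hcx⟩
      exact ⟨c, (hkeq c).mp hc, by rw [← hveq c]; exact hcx⟩
    · rintro ⟨c, hc, hcx⟩
      exact ⟨c, (hkeq c).mpr hc, by rw [hveq c]; exact hcx⟩
  have htop' : top = (PySem.List.max? co.values (fun v => v)).getD 0 := by
    rw [htop, hmaxeq]
  have hvne : co.values ≠ [] := by
    rw [hvals_co]
    intro h
    exact hne (List.map_eq_nil_iff.mp h)
  obtain ⟨v0, hv0⟩ : ∃ v, PySem.List.max? co.values (fun v => v) = some v := by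
    cases h : PySem.List.max? co.values (fun v => v) with
    | none =>
        rw [PySem.List.max?_eq_none_iff] at h
        exact absurd h hvne
    | some v => exact ⟨v, rfl⟩
  have hmv : (PySem.List.max? co.values (fun v => v)).getD 0 = v0 := by rw [hv0]; rfl
  have htopv : top = v0 := by rw [htop', hmv]
  obtain ⟨c0, hc0k, hc0v⟩ : ∃ c ∈ co.keys, co.getD c 0 = v0 := by
    have := PySem.List.max?_mem hv0
    rw [hvals_co] at this
    obtain ⟨c, hc, hcv⟩ := List.mem_map.mp this
    exact ⟨c, hc, hcv⟩
  have hvmax : ∀ c ∈ co.keys, co.getD c 0 ≤ v0 := by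
    intro c hc
    have := PySem.List.max?_isMax hv0 (co.getD c 0)
      (by rw [hvals_co]; exact List.mem_map.mpr ⟨c, hc, rfl⟩)
    exact this
  obtain ⟨hsp1, hsp2, hsp3⟩ := foldMax_spec (fun c => co.getD c 0) v0 co.keys none
  obtain ⟨wA, hfoldA, hc0le⟩ := hsp2 c0 hc0k hc0v
  have hwAk : wA ∈ co.keys ∧ co.getD wA 0 = v0 := by
    rcases hsp1 with h | ⟨w, hw, hwm, hwv⟩
    · rw [hfoldA] at h; exact absurd h (by simp)
    · rw [hfoldA] at hw
      injection hw with hww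
      subst hww
      exact ⟨hwm, hwv⟩
  have hwAmax : ∀ c ∈ co.keys, co.getD c 0 = v0 → c ≤ wA := by
    intro c hc hcv
    obtain ⟨w', hw', hcw'⟩ := hsp2 c hc hcv
    rw [hfoldA] at hw'
    injection hw' with hww
    subst hww
    exact hcw'
  have hwAfl : wA ∈ cnt.keys.filter (fun c => cnt.getD c 0 == top) := by
    rw [List.mem_filter]
    refine ⟨(hkeq wA).mp hwAk.1, ?_⟩
    rw [beq_iff_eq, ← hveq wA, hwAk.2, htopv]
  obtain ⟨wB, hwB⟩ : ∃ w, PySem.List.max? (cnt.keys.filter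
      (fun c => cnt.getD c 0 == top)) (fun c => c) = some w := by
    cases h : PySem.List.max? (cnt.keys.filter (fun c => cnt.getD c 0 == top)) (fun c => c) with
    | none =>
        rw [PySem.List.max?_eq_none_iff] at h
        rw [h] at hwAfl
        exact absurd hwAfl (List.not_mem_nil)
    | some w => exact ⟨w, rfl⟩
  have hwBmem := PySem.List.max?_mem hwB
  have hwBmax := PySem.List.max?_isMax hwB
  have hwBk : wB ∈ co.keys ∧ co.getD wB 0 = v0 := by
    have := List.mem_filter.mp hwBmem
    refine ⟨(hkeq wB).mpr this.1, ?_⟩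
    have hb := this.2
    rw [beq_iff_eq] at hb
    rw [hveq wB, hb, htopv]
  have hwAB : wA = wB := by
    have h1 : wA ≤ wB := hwBmax wA hwAfl
    have h2 : wB ≤ wA := hwAmax wB hwBk.1 hwBk.2
    exact le_antisymm h1 h2
  have hwinner : winner = wA := by rw [hwin, hwB, hwAB]; rfl
  have hwA0 : warA d co = co.keys.foldl (fun ans c =>
      if co.getD c 0 < top ∧ some c ≠ some wA then
        (ans.insert ((some wA).getD ' ') (ans.getD ((some wA).getD ' ') 0 + co.getD c 0)).insert c
          ((ans.insert ((some wA).getD ' ') (ans.getD ((some wA).getD ' ') 0 + co.getD c 0)).getD c 0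
            - co.getD c 0)
      else ans) d := by
    unfold warA
    simp only []
    rw [← htop']
    rw [show (co.keys.foldl (fun ma c =>
      if co.getD c 0 = top ∧ ma.all (fun a => decide (a ≤ c)) = true then some c else ma)
      none) = some wA from by rw [htopv]; exact hfoldA]
  have hbodyA : co.keys.foldl (fun ans c =>
      if co.getD c 0 < top ∧ some c ≠ some wA then
        (ans.insert ((some wA).getD ' ') (ans.getD ((some wA).getD ' ') 0 + co.getD c 0)).insert c
          ((ans.insert ((some wA).getD ' ') (ans.getD ((some wA).getD ' ') 0 + co.getD c 0)).getD c 0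
            - co.getD c 0)
      else ans) d =
    co.keys.foldl (fun ans c =>
      if (fun c => co.getD c 0) c < top then
        (ans.insert wA (ans.getD wA 0 + (fun c => co.getD c 0) c)).insert c
          ((ans.insert wA (ans.getD wA 0 + (fun c => co.getD c 0) c)).getD c 0
            - (fun c => co.getD c 0) c)
      else ans) d := by
    apply PySem.List.foldl_congr_mem
    intro acc c _
    by_cases hc : co.getD c 0 < top
    · have hcw : some c ≠ some wA := by
        intro heq
        injection heq with heq
        subst heq
        rw [hwAk.2, ← htopv] at hc
        exact lt_irrefl _ hc
      rw [if_pos ⟨hc, hcw⟩, if_pos hc]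
      rfl
    · rw [if_neg (fun hcc => hc hcc.1), if_neg hc]
  have hwA1 : warA d co = co.keys.foldl (fun ans c =>
      if (fun c => co.getD c 0) c < top then
        (ans.insert wA (ans.getD wA 0 + (fun c => co.getD c 0) c)).insert c
          ((ans.insert wA (ans.getD wA 0 + (fun c => co.getD c 0) c)).getD c 0
            - (fun c => co.getD c 0) c)
      else ans) d := by rw [hwA0]; exact hbodyA
  have hAspec := warFold_spec wA top (fun c => co.getD c 0)
    (by show ¬ co.getD wA 0 < top; rw [hwAk.2, ← htopv]; exact lt_irrefl _) co.keys d hdnd hsub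
    (hsub wA hwAk.1) hcond
  have hbodyB : cnt.keys.foldl (fun x y =>
      (fun a cv => if cv.2 < top then
        (a.insert winner (a.getD winner 0 + cv.2)).insert cv.1
          ((a.insert winner (a.getD winner 0 + cv.2)).getD cv.1 0 - cv.2)
      else a) x ((fun k => (k, cnt.getD k 0)) y)) d =
    cnt.keys.foldl (fun ans c =>
      if (fun c => cnt.getD c 0) c < top then
        (ans.insert wA (ans.getD wA 0 + (fun c => cnt.getD c 0) c)).insert c
          ((ans.insert wA (ans.getD wA 0 + (fun c => cnt.getD c 0) c)).getD c 0
            - (fun c => cnt.getD c 0) c)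
      else ans) d := by
    rw [hwinner]
  have hB1 : cnt.items.foldl (fun a cv =>
      if cv.2 < top then
        (a.insert winner (a.getD winner 0 + cv.2)).insert cv.1
          ((a.insert winner (a.getD winner 0 + cv.2)).getD cv.1 0 - cv.2)
      else a) d = cnt.keys.foldl (fun ans c =>
      if (fun c => cnt.getD c 0) c < top then
        (ans.insert wA (ans.getD wA 0 + (fun c => cnt.getD c 0) c)).insert c
          ((ans.insert wA (ans.getD wA 0 + (fun c => cnt.getD c 0) c)).getD c 0
            - (fun c => cnt.getD c 0) c)
      else ans) d := by
    rw [PySem.Dict.items_eq_map_keys cnt hcntnd 0, List.foldl_map]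
    exact hbodyB
  have hBspec := warFold_spec wA top (fun c => cnt.getD c 0)
    (by show ¬ cnt.getD wA 0 < top; rw [← hveq wA, hwAk.2, ← htopv]; exact lt_irrefl _) cnt.keys d hdnd
    (by intro c hc; exact hsub c ((hkeq c).mpr hc)) (hsub wA hwAk.1) hcntnd
  refine ⟨?_, by rw [hwA1]; exact hAspec.1⟩
  rw [hwA1, hB1]
  apply dict_eq_of_keys_getD _ _ (by rw [hAspec.1]; exact hdnd) (by rw [hAspec.1, hBspec.1])
  intro x
  rw [hAspec.2 x, hBspec.2 x]
  simp only []
  have hperm : co.keys.Perm cnt.keys := (List.perm_ext_iff_of_nodup hcond hcntnd).mpr hkeq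
  have hfeq : (fun c => co.getD c 0) = (fun c => cnt.getD c 0) := funext hveq
  have hpeq : (fun c => decide (co.getD c 0 < top)) = (fun c => decide (cnt.getD c 0 < top)) :=
    funext (fun c => by rw [hveq c])
  have hsum : ((co.keys.filter (fun c => decide (co.getD c 0 < top))).map
      (fun c => co.getD c 0)).sum =
      ((cnt.keys.filter (fun c => decide (cnt.getD c 0 < top))).map
      (fun c => cnt.getD c 0)).sum := by
    rw [hfeq, hpeq]
    exact List.Perm.sum_eq (List.Perm.map _ (List.Perm.filter _ hperm))
  rw [hsum]
  have hmemiff : (x ≠ wA ∧ x ∈ co.keys ∧ co.getD x 0 < top) ↔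
      (x ≠ wA ∧ x ∈ cnt.keys ∧ cnt.getD x 0 < top) := by
    rw [hveq x, hkeq x]
  by_cases hm : x ≠ wA ∧ x ∈ co.keys ∧ co.getD x 0 < top
  · rw [if_pos hm, if_pos (hmemiff.mp hm), hveq x]
  · rw [if_neg hm, if_neg (fun hc => hm (hmemiff.mpr hc))]


-- ============ the row-major cell enumeration and the seed counts ============

lemma foldl_flatMap {α β γ : Type} (l : List α) (g : α → List β) (f : γ → β → γ) (init : γ) :
    (l.flatMap g).foldl f init = l.foldl (fun a x => (g x).foldl f a) init := by
  rw [List.flatMap_def, List.foldl_flatten, List.foldl_map]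

def scanPairs (maps : List String) : List (Int × Int) :=
  (PySem.List.pyRange 0 (pvN maps) 1).flatMap
    (fun i => (PySem.List.pyRange 0 (pvM maps) 1).map (fun j => (i, j)))

lemma mem_scanPairs {maps : List String} {p : Int × Int} :
    p ∈ scanPairs maps ↔ 0 ≤ p.1 ∧ p.1 < pvN maps ∧ 0 ≤ p.2 ∧ p.2 < pvM maps := by
  rcases p with ⟨a, b⟩
  simp only [scanPairs, List.mem_flatMap, List.mem_map, PySem.List.mem_pyRange_one,
    Prod.mk.injEq]
  constructor
  · rintro ⟨i, ⟨h1, h2⟩, j, ⟨h3, h4⟩, he1, he2⟩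
    subst he1; subst he2
    exact ⟨h1, h2, h3, h4⟩
  · rintro ⟨h1, h2, h3, h4⟩
    exact ⟨a, ⟨h1, h2⟩, b, ⟨h3, h4⟩, rfl, rfl⟩

lemma nodup_scanPairs (maps : List String) : (scanPairs maps).Nodup := by
  unfold scanPairs
  rw [List.nodup_flatMap]
  constructor
  · intro i _
    exact (PySem.List.nodup_pyRange_one _ _).map (fun a b h => by
      simpa using congrArg Prod.snd h)
  · have := PySem.List.nodup_pyRange_one 0 (pvN maps)
    refine List.Pairwise.imp ?_ this
    intro i i' hne
    intro x hx hx'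
    obtain ⟨j, -, hj⟩ := List.mem_map.mp hx
    obtain ⟨j', -, hj'⟩ := List.mem_map.mp hx'
    have : i = i' := by
      have h1 := congrArg Prod.fst hj
      have h2 := congrArg Prod.fst hj'
      simp at h1 h2
      omega
    exact hne this

lemma length_scanPairs (maps : List String) :
    (scanPairs maps).length = (pvN maps).toNat * (pvM maps).toNat := by
  unfold scanPairs
  rw [List.length_flatMap]
  have : ∀ i : Int, ((PySem.List.pyRange 0 (pvM maps) 1).map
      (fun j => ((i, j) : Int × Int))).length = (pvM maps).toNat := by
    intro i
    rw [List.length_map, PySem.List.length_pyRange_one]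
    simp
  calc ((PySem.List.pyRange 0 (pvN maps) 1).map (fun i =>
        ((PySem.List.pyRange 0 (pvM maps) 1).map (fun j => ((i, j) : Int × Int))).length)).sum
      = ((PySem.List.pyRange 0 (pvN maps) 1).map (fun _ => (pvM maps).toNat)).sum := by
        apply congrArg
        exact List.map_congr_left (fun i _ => this i)
    _ = (pvN maps).toNat * (pvM maps).toNat := by
        rw [List.map_const', List.sum_replicate, PySem.List.length_pyRange_one]
        simp [Nat.mul_comm]

lemma nested_fold_eq {γ : Type} (maps : List String) (body : γ → (Int × Int) → γ) (init : γ) :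
    (PySem.List.pyRange 0 (pvN maps) 1).foldl (fun st i =>
      (PySem.List.pyRange 0 (pvM maps) 1).foldl (fun st j => body st (i, j)) st) init =
    (scanPairs maps).foldl body init := by
  unfold scanPairs
  rw [foldl_flatMap]
  apply PySem.List.foldl_congr_mem
  intro acc i _
  rw [List.foldl_map]

def seedBody (maps : List String) (ans : PySem.Dict Char Int) (p : Int × Int) :
    PySem.Dict Char Int :=
  if pvChar maps p.1 p.2 ≠ '.' then
    ans.insert (pvChar maps p.1 p.2) (ans.getD (pvChar maps p.1 p.2) 0 + 1)
  else ans

def seedB (maps : List String) : PySem.Dict Char Int :=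
  (scanPairs maps).foldl (seedBody maps) PySem.Dict.empty

lemma seedB_nested (maps : List String) :
    (PySem.List.pyRange 0 (pvN maps) 1).foldl (fun ans i =>
      (PySem.List.pyRange 0 (pvM maps) 1).foldl (fun ans j =>
        if pvChar maps i j ≠ '.' then
          ans.insert (pvChar maps i j) (ans.getD (pvChar maps i j) 0 + 1)
        else ans) ans) PySem.Dict.empty = seedB maps := by
  rw [seedB, ← nested_fold_eq maps (seedBody maps)]
  rfl

lemma seedA_nested (maps : List String) :
    (PySem.List.pyRange 0 (pvN maps) 1).foldl (fun ans i =>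
      (PySem.List.pyRange 0 (pvM maps) 1).foldl (fun ans j =>
        if pvChar maps i j ≠ '.' then
          if ans.contains (pvChar maps i j) = false then ans.insert (pvChar maps i j) 1
          else ans.insert (pvChar maps i j) (ans.getD (pvChar maps i j) 0 + 1)
        else ans) ans) PySem.Dict.empty = seedB maps := by
  rw [← seedB_nested]
  apply PySem.List.foldl_congr_mem
  intro acc i _
  apply PySem.List.foldl_congr_mem
  intro acc' j _
  by_cases h : pvChar maps i j ≠ '.'
  · rw [if_pos h, if_pos h, country_update_eq]
  · rw [if_neg h, if_neg h]

lemma seedB_keys (maps : List String) :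
    (seedB maps).keys = PySem.Set.ofList
      (((scanPairs maps).filter (fun p => decide (pvChar maps p.1 p.2 ≠ '.'))).map
        (fun p => pvChar maps p.1 p.2)) := by
  unfold seedB seedBody
  rw [PySem.List.foldl_ite_eq_foldl_filter]
  rw [PySem.Dict.keys_foldl_insert_key _ (fun p : Int × Int => pvChar maps p.1 p.2)
    (fun d (p : Int × Int) => d.getD (pvChar maps p.1 p.2) 0 + 1) PySem.Dict.empty]
  rw [PySem.Dict.keys_empty, PySem.Set.update_nil_left]

lemma seedB_keys_nodup (maps : List String) : (seedB maps).keys.Nodup := by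
  rw [seedB_keys]
  apply PySem.Set.nodup_ofList

lemma seedB_keys_mem {maps : List String} {p : Int × Int} (h : okb maps p = true) :
    pvChar maps p.1 p.2 ∈ (seedB maps).keys := by
  have hb := okb_bounds h
  have hch : pvChar maps p.1 p.2 ≠ '.' := by
    simp only [okb, decide_eq_true_eq] at h
    exact h.2.2.2.2
  rw [seedB_keys, PySem.Set.mem_ofList]
  apply List.mem_map.mpr
  refine ⟨p, List.mem_filter.mpr ⟨mem_scanPairs.mpr ⟨hb.1.1, hb.1.2, hb.2.1, hb.2.2⟩, ?_⟩, rfl⟩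
  simp [hch]

def okList (maps : List String) : List (Int × Int) :=
  (scanPairs maps).filter (fun p => okb maps p)

lemma mem_okList {maps : List String} {p : Int × Int} :
    p ∈ okList maps ↔ okb maps p = true := by
  unfold okList
  rw [List.mem_filter]
  constructor
  · rintro ⟨-, h⟩; exact h
  · intro h
    have hb := okb_bounds h
    exact ⟨mem_scanPairs.mpr ⟨hb.1.1, hb.1.2, hb.2.1, hb.2.2⟩, h⟩

lemma nodup_okList (maps : List String) : (okList maps).Nodup :=
  (nodup_scanPairs maps).filter _

lemma length_okList_le (maps : List String) :
    (okList maps).length ≤ (pvN maps).toNat * (pvM maps).toNat := by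
  have := List.length_filter_le (fun p => okb maps p) (scanPairs maps)
  rw [length_scanPairs] at this
  exact this


-- ============ B-side: union-find ============

def pstep (par : PySem.Dict (Int × Int) (Int × Int)) (p : Int × Int) : Int × Int :=
  par.getD p p

def IsRootP (par : PySem.Dict (Int × Int) (Int × Int)) (p : Int × Int) : Prop :=
  pstep par p = p

def iterP (par : PySem.Dict (Int × Int) (Int × Int)) : Nat → (Int × Int) → (Int × Int)
  | 0, p => p
  | j + 1, p => iterP par j (pstep par p)

lemma iterP_root {par : PySem.Dict (Int × Int) (Int × Int)} {r : Int × Int}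
    (h : IsRootP par r) : ∀ j, iterP par j r = r := by
  intro j
  induction j with
  | zero => rfl
  | succ j ih => show iterP par j (pstep par r) = r; rw [h]; exact ih

lemma iterP_add (par : PySem.Dict (Int × Int) (Int × Int)) :
    ∀ (a b : Nat) (p : Int × Int), iterP par (a + b) p = iterP par b (iterP par a p) := by
  intro a
  induction a with
  | zero => intro b p; simp [iterP]
  | succ a ih =>
      intro b p
      have : a + 1 + b = (a + b) + 1 := by omega
      rw [this]
      show iterP par (a + b) (pstep par p) = iterP par b (iterP par a (pstep par p))
      exact ih b (pstep par p)

def RootsTo (par : PySem.Dict (Int × Int) (Int × Int)) (p r : Int × Int) : Prop :=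
  ∃ j, iterP par j p = r ∧ IsRootP par r

lemma rootsTo_unique {par : PySem.Dict (Int × Int) (Int × Int)} {p r r' : Int × Int}
    (h1 : RootsTo par p r) (h2 : RootsTo par p r') : r = r' := by
  obtain ⟨j1, hj1, hr1⟩ := h1
  obtain ⟨j2, hj2, hr2⟩ := h2
  rcases Nat.le_total j1 j2 with h | h
  · obtain ⟨k, hk⟩ := Nat.le.dest h
    rw [← hk, iterP_add, hj1, iterP_root hr1] at hj2
    exact hj2
  · obtain ⟨k, hk⟩ := Nat.le.dest h
    rw [← hk, iterP_add, hj2, iterP_root hr2] at hj1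
    exact hj1.symm

lemma ufFind_eq_of_iter {par : PySem.Dict (Int × Int) (Int × Int)} :
    ∀ (j : Nat) (p r : Int × Int) (fuel : Nat), iterP par j p = r → IsRootP par r →
      j ≤ fuel → ufFind par fuel p = r := by
  intro j
  induction j with
  | zero =>
      intro p r fuel hj hr _
      have hpr : p = r := hj
      have hr' : par.getD p p = p := by rw [hpr]; exact hr
      cases fuel with
      | zero => exact hpr
      | succ f =>
          show (if par.getD p p = p then p else ufFind par f (par.getD p p)) = r
          rw [if_pos hr']
          exact hpr
  | succ j ih =>
      intro p r fuel hj hr hle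
      by_cases hp : par.getD p p = p
      · have hp' : IsRootP par p := hp
        have hrp2 : r = p := by rw [← hj, iterP_root hp']
        cases fuel with
        | zero => exact hrp2.symm
        | succ f =>
            show (if par.getD p p = p then p else ufFind par f (par.getD p p)) = r
            rw [if_pos hp]
            exact hrp2.symm
      · cases fuel with
        | zero => omega
        | succ f =>
            show (if par.getD p p = p then p else ufFind par f (par.getD p p)) = r
            rw [if_neg hp]
            exact ih (pstep par p) r f hj hr (by omega)

def UFInv (maps : List String) (par : PySem.Dict (Int × Int) (Int × Int)) (k : Nat) : Prop :=
  par.keys = okList maps ∧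
  (∀ p ∈ okList maps, pstep par p ∈ okList maps ∧ Conn maps p (pstep par p)) ∧
  (∀ p ∈ okList maps, ∃ j, j ≤ k ∧ IsRootP par (iterP par j p))

lemma iterP_ok {maps : List String} {par : PySem.Dict (Int × Int) (Int × Int)}
    (hC : ∀ p ∈ okList maps, pstep par p ∈ okList maps ∧ Conn maps p (pstep par p)) :
    ∀ (j : Nat) (p : Int × Int), p ∈ okList maps →
      iterP par j p ∈ okList maps ∧ Conn maps p (iterP par j p) := by
  intro j
  induction j with
  | zero => intro p hp; exact ⟨hp, Relation.ReflTransGen.refl⟩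
  | succ j ih =>
      intro p hp
      obtain ⟨h1, h2⟩ := hC p hp
      obtain ⟨h3, h4⟩ := ih (pstep par p) h1
      exact ⟨h3, conn_trans h2 h4⟩

lemma pstep_insert (par : PySem.Dict (Int × Int) (Int × Int)) (rp rq x : Int × Int) :
    pstep (par.insert rp rq) x = if x = rp then rq else pstep par x := by
  unfold pstep
  rw [PySem.Dict.getD_insert]

lemma rootsTo_insert_base {par : PySem.Dict (Int × Int) (Int × Int)} {rp rq : Int × Int}
    (hrp : IsRootP par rp) (hrq : IsRootP par rq) (hne : rp ≠ rq) (p : Int × Int)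
    (hp : IsRootP par p) :
    ∃ j', j' ≤ 1 ∧ iterP (par.insert rp rq) j' p = (if p = rp then rq else p) ∧
      IsRootP (par.insert rp rq) (if p = rp then rq else p) := by
  have hrootq : IsRootP (par.insert rp rq) rq := by
    show pstep (par.insert rp rq) rq = rq
    rw [pstep_insert, if_neg (fun h => hne h.symm)]
    exact hrq
  by_cases h : p = rp
  · subst h
    rw [if_pos rfl]
    refine ⟨1, by omega, ?_, hrootq⟩
    show iterP (par.insert p rq) 0 (pstep (par.insert p rq) p) = rq
    rw [pstep_insert, if_pos rfl]
    rfl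
  · rw [if_neg h]
    refine ⟨0, by omega, rfl, ?_⟩
    show pstep (par.insert rp rq) p = p
    rw [pstep_insert, if_neg h]
    exact hp

lemma rootsTo_insert {par : PySem.Dict (Int × Int) (Int × Int)} {rp rq : Int × Int}
    (hrp : IsRootP par rp) (hrq : IsRootP par rq) (hne : rp ≠ rq) :
    ∀ (j : Nat) (p r : Int × Int), iterP par j p = r → IsRootP par r →
      ∃ j', j' ≤ j + 1 ∧ iterP (par.insert rp rq) j' p = (if r = rp then rq else r) ∧
        IsRootP (par.insert rp rq) (if r = rp then rq else r) := by
  intro j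
  induction j with
  | zero =>
      intro p r hj hr
      have hpr : p = r := hj
      cases hpr
      exact rootsTo_insert_base hrp hrq hne p hr
  | succ j ih =>
      intro p r hj hr
      by_cases hp : IsRootP par p
      · have hrp' : r = p := by rw [← hj, iterP_root hp]
        cases hrp'
        obtain ⟨j', hle, h1, h2⟩ := rootsTo_insert_base hrp hrq hne p hp
        exact ⟨j', by omega, h1, h2⟩
      · have hpne : p ≠ rp := by
          intro h; subst h; exact hp hrp
        have hj' : iterP par j (pstep par p) = r := hj
        obtain ⟨j', hj'le, hj'eq, hj'root⟩ := ih (pstep par p) r hj' hr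
        refine ⟨j' + 1, by omega, ?_, hj'root⟩
        show iterP (par.insert rp rq) j' (pstep (par.insert rp rq) p) = _
        rw [pstep_insert, if_neg hpne]
        exact hj'eq

def uStep (maps : List String)
    (st : PySem.Dict (Int × Int) (Int × Int) × PySem.Dict (Int × Int) Int)
    (e : (Int × Int) × (Int × Int)) :
    PySem.Dict (Int × Int) (Int × Int) × PySem.Dict (Int × Int) Int :=
  if st.1.contains e.2 then
    let rp := ufFind st.1 (ufFuel maps) e.1
    let rq := ufFind st.1 (ufFuel maps) e.2
    if rp ≠ rq then
      if st.2.getD rp 0 < st.2.getD rq 0 then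
        (st.1.insert rp rq, st.2.insert rq (st.2.getD rq 0 + st.2.getD rp 0))
      else
        (st.1.insert rq rp, st.2.insert rp (st.2.getD rp 0 + st.2.getD rq 0))
    else st
  else st

def edgesOf (p : Int × Int) : List ((Int × Int) × (Int × Int)) :=
  [(p, (p.1 + 1, p.2)), (p, (p.1, p.2 + 1))]

def RootEqv (par : PySem.Dict (Int × Int) (Int × Int)) (p q : Int × Int) : Prop :=
  ∃ r, RootsTo par p r ∧ RootsTo par q r

lemma union_insert_spec (maps : List String)
    {par : PySem.Dict (Int × Int) (Int × Int)} {k : Nat} (hinv : UFInv maps par k)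
    {rA rB : Int × Int} (hA : IsRootP par rA) (hB : IsRootP par rB) (hne : rA ≠ rB)
    (hAok : rA ∈ okList maps) (hBok : rB ∈ okList maps) (hconn : Conn maps rA rB) :
    UFInv maps (par.insert rA rB) (k + 1) ∧
    (∀ p q, RootEqv par p q → RootEqv (par.insert rA rB) p q) ∧
    (∀ p q rP rQ, RootsTo par p rP → RootsTo par q rQ →
      (rP = rA ∨ rP = rB) → (rQ = rA ∨ rQ = rB) → RootEqv (par.insert rA rB) p q) := by
  obtain ⟨hkeys, hC, hR⟩ := hinv
  have hconA : par.contains rA = true := by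
    rw [PySem.Dict.contains_iff_mem_keys, hkeys]; exact hAok
  have hmap : ∀ (p r : Int × Int), RootsTo par p r →
      RootsTo (par.insert rA rB) p (if r = rA then rB else r) := by
    rintro p r ⟨j, hj, hr⟩
    obtain ⟨j', -, h1, h2⟩ := rootsTo_insert hA hB hne j p r hj hr
    exact ⟨j', h1, h2⟩
  refine ⟨⟨?_, ?_, ?_⟩, ?_, ?_⟩
  · rw [PySem.Dict.keys_insert_of_contains _ _ hconA, hkeys]
  · intro p hp
    rw [pstep_insert]
    by_cases h : p = rA
    · subst h
      rw [if_pos rfl]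
      exact ⟨hBok, hconn⟩
    · rw [if_neg h]
      exact hC p hp
  · intro p hp
    obtain ⟨j, hjle, hjr⟩ := hR p hp
    obtain ⟨j', hj'le, hj'eq, hj'root⟩ := rootsTo_insert hA hB hne j p (iterP par j p) rfl hjr
    exact ⟨j', by omega, by rw [hj'eq]; exact hj'root⟩
  · rintro p q ⟨r, h1, h2⟩
    exact ⟨if r = rA then rB else r, hmap p r h1, hmap q r h2⟩
  · intro p q rP rQ h1 h2 hP hQ
    have e1 : (if rP = rA then rB else rP) = rB := by
      rcases hP with h | h
      · rw [if_pos h]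
      · rw [h, if_neg (fun hc => hne hc.symm)]
    have e2 : (if rQ = rA then rB else rQ) = rB := by
      rcases hQ with h | h
      · rw [if_pos h]
      · rw [h, if_neg (fun hc => hne hc.symm)]
    refine ⟨rB, ?_, ?_⟩
    · have := hmap p rP h1
      rw [e1] at this
      exact this
    · have := hmap q rQ h2
      rw [e2] at this
      exact this

lemma ufFold (maps : List String) :
    ∀ (es : List ((Int × Int) × (Int × Int)))
      (st : PySem.Dict (Int × Int) (Int × Int) × PySem.Dict (Int × Int) Int) (k : Nat),
    UFInv maps st.1 k → k + es.length + 1 ≤ ufFuel maps →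
    (∀ e ∈ es, e.1 ∈ okList maps ∧ (e.2 ∈ okList maps → Adj maps e.1 e.2)) →
    ∃ k', k' ≤ k + es.length ∧ UFInv maps (es.foldl (uStep maps) st).1 k' ∧
    (∀ p q, RootEqv st.1 p q → RootEqv (es.foldl (uStep maps) st).1 p q) ∧
    (∀ e ∈ es, e.2 ∈ okList maps → RootEqv (es.foldl (uStep maps) st).1 e.1 e.2) := by
  intro es
  induction es with
  | nil =>
      intro st k hinv _ _
      exact ⟨k, le_refl _, hinv, fun p q h => h, fun e he => absurd he (List.not_mem_nil)⟩
  | cons e es ih =>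
      intro st k hinv hfuel hes
      obtain ⟨hkeys, hC, hR⟩ := hinv
      obtain ⟨he1, he2⟩ := hes e List.mem_cons_self
      by_cases hq : e.2 ∈ okList maps
      · -- valid edge
        have hcon : st.1.contains e.2 = true := by
          rw [PySem.Dict.contains_iff_mem_keys, hkeys]; exact hq
        obtain ⟨j1, hj1le, hj1r⟩ := hR e.1 he1
        obtain ⟨j2, hj2le, hj2r⟩ := hR e.2 hq
        set rp := iterP st.1 j1 e.1 with hrp
        set rq := iterP st.1 j2 e.2 with hrq
        have hfind1 : ufFind st.1 (ufFuel maps) e.1 = rp :=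
          ufFind_eq_of_iter j1 e.1 rp (ufFuel maps) rfl hj1r (by omega)
        have hfind2 : ufFind st.1 (ufFuel maps) e.2 = rq :=
          ufFind_eq_of_iter j2 e.2 rq (ufFuel maps) rfl hj2r (by omega)
        have hrpok := iterP_ok hC j1 e.1 he1
        have hrqok := iterP_ok hC j2 e.2 hq
        have hrt1 : RootsTo st.1 e.1 rp := ⟨j1, rfl, hj1r⟩
        have hrt2 : RootsTo st.1 e.2 rq := ⟨j2, rfl, hj2r⟩
        by_cases hne : rp ≠ rq
        · -- union happens; Source B picks the direction by size
          have hCrpq : Conn maps rp rq :=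
            conn_trans (conn_symm hrpok.2)
              (conn_trans (Relation.ReflTransGen.single (he2 hq)) hrqok.2)
          have hstep : uStep maps st e =
              (if st.2.getD rp 0 < st.2.getD rq 0 then
                (st.1.insert rp rq, st.2.insert rq (st.2.getD rq 0 + st.2.getD rp 0))
              else
                (st.1.insert rq rp, st.2.insert rp (st.2.getD rp 0 + st.2.getD rq 0))) := by
            unfold uStep
            rw [if_pos hcon]
            show (if ufFind st.1 (ufFuel maps) e.1 ≠ ufFind st.1 (ufFuel maps) e.2 then _
              else st) = _
            rw [hfind1, hfind2, if_pos hne]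
          have hnext : ∃ par' : PySem.Dict (Int × Int) (Int × Int),
              (uStep maps st e).1 = par' ∧
              UFInv maps par' (k + 1) ∧
              (∀ p q, RootEqv st.1 p q → RootEqv par' p q) ∧
              RootEqv par' e.1 e.2 := by
            by_cases hsz : st.2.getD rp 0 < st.2.getD rq 0
            · have hu := union_insert_spec maps ⟨hkeys, hC, hR⟩ hj1r hj2r hne
                hrpok.1 hrqok.1 hCrpq
              refine ⟨st.1.insert rp rq, by rw [hstep, if_pos hsz], hu.1, hu.2.1, ?_⟩
              exact hu.2.2 e.1 e.2 rp rq hrt1 hrt2 (Or.inl rfl) (Or.inr rfl)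
            · have hu := union_insert_spec maps ⟨hkeys, hC, hR⟩ hj2r hj1r
                (fun h => hne h.symm) hrqok.1 hrpok.1 (conn_symm hCrpq)
              refine ⟨st.1.insert rq rp, by rw [hstep, if_neg hsz], hu.1, hu.2.1, ?_⟩
              exact hu.2.2 e.1 e.2 rp rq hrt1 hrt2 (Or.inr rfl) (Or.inl rfl)
          obtain ⟨par', hpar', hinv', hmono, hedge⟩ := hnext
          obtain ⟨k', hk'le, hinv'', hmono', hes'⟩ := ih (uStep maps st e) (k + 1)
            (by rw [hpar']; exact hinv') (by simp only [List.length_cons] at hfuel; omega)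
            (fun e' he' => hes e' (List.mem_cons_of_mem _ he'))
          refine ⟨k', by simp only [List.length_cons]; omega, ?_, ?_, ?_⟩
          · simpa only [List.foldl_cons] using hinv''
          · intro p q h
            simp only [List.foldl_cons]
            exact hmono' p q (by rw [hpar']; exact hmono p q h)
          · intro e' he' hq'
            rcases List.mem_cons.mp he' with h | h
            · subst h
              simp only [List.foldl_cons]
              exact hmono' _ _ (by rw [hpar']; exact hedge)
            · simp only [List.foldl_cons]
              exact hes' e' h hq'
        · -- already equal roots
          have hne' : rp = rq := not_not.mp hne
          have hstep : uStep maps st e = st := by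
            unfold uStep
            rw [if_pos hcon]
            show (if ufFind st.1 (ufFuel maps) e.1 ≠ ufFind st.1 (ufFuel maps) e.2 then _
              else st) = st
            rw [hfind1, hfind2, if_neg hne]
          have hedge : RootEqv st.1 e.1 e.2 := ⟨rp, hrt1, hne' ▸ hrt2⟩
          obtain ⟨k', hk'le, hinv', hmono', hes'⟩ := ih st k
            ⟨hkeys, hC, hR⟩ (by simp only [List.length_cons] at hfuel; omega)
            (fun e' he' => hes e' (List.mem_cons_of_mem _ he'))
          refine ⟨k', by simp only [List.length_cons]; omega, ?_, ?_, ?_⟩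
          · simpa only [List.foldl_cons, hstep] using hinv'
          · intro p q h
            simp only [List.foldl_cons, hstep]
            exact hmono' p q h
          · intro e' he' hq'
            rcases List.mem_cons.mp he' with h | h
            · subst h
              simp only [List.foldl_cons, hstep]
              exact hmono' _ _ hedge
            · simp only [List.foldl_cons, hstep]
              exact hes' e' h hq'
      · -- invalid edge: skipped
        have hcon : st.1.contains e.2 = false := by
          rw [← Bool.not_eq_true, PySem.Dict.contains_iff_mem_keys, hkeys]
          exact hq
        have hstep : uStep maps st e = st := by
          unfold uStep
          rw [hcon]
          simp
        obtain ⟨k', hk'le, hinv', hmono', hes'⟩ := ih st k ⟨hkeys, hC, hR⟩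
          (by simp only [List.length_cons] at hfuel; omega)
          (fun e' he' => hes e' (List.mem_cons_of_mem _ he'))
        refine ⟨k', by simp only [List.length_cons]; omega, ?_, ?_, ?_⟩
        · simpa only [List.foldl_cons, hstep] using hinv'
        · intro p q h
          simp only [List.foldl_cons, hstep]
          exact hmono' p q h
        · intro e' he' hq'
          rcases List.mem_cons.mp he' with h | h
          · subst h; exact absurd hq' hq
          · simp only [List.foldl_cons, hstep]
            exact hes' e' h hq'

-- ============ the union-find run of B and its roots ============

def parent0D (maps : List String) : PySem.Dict (Int × Int) (Int × Int) :=
  (okList maps).foldl (fun par p => par.insert p p) PySem.Dict.empty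

def edgesD (maps : List String) : List ((Int × Int) × (Int × Int)) :=
  (okList maps).flatMap edgesOf

def size0D (maps : List String) : PySem.Dict (Int × Int) Int :=
  (okList maps).foldl (fun sz p => sz.insert p 1) PySem.Dict.empty

def parentD (maps : List String) : PySem.Dict (Int × Int) (Int × Int) :=
  ((edgesD maps).foldl (uStep maps) (parent0D maps, size0D maps)).1

def rootD (maps : List String) (p : Int × Int) : Int × Int :=
  ufFind (parentD maps) (ufFuel maps) p

lemma parent0D_keys (maps : List String) : (parent0D maps).keys = okList maps := by
  unfold parent0D
  rw [PySem.Dict.keys_foldl_insert_key _ (fun p : Int × Int => p)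
    (fun _ (p : Int × Int) => p) PySem.Dict.empty]
  rw [PySem.Dict.keys_empty, PySem.Set.update_nil_left]
  have : List.map (fun p : Int × Int => p) (okList maps) = okList maps := List.map_id' _
  rw [this, PySem.Set.ofList_eq_self_of_nodup _ (nodup_okList maps)]

lemma idFold_getD (l : List (Int × Int)) :
    ∀ (d : PySem.Dict (Int × Int) (Int × Int)) (q : Int × Int),
    (l.foldl (fun par p => par.insert p p) d).getD q q =
      if q ∈ l then q else d.getD q q := by
  induction l with
  | nil => intro d q; simp
  | cons x l ih =>
      intro d q
      simp only [List.foldl_cons]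
      rw [ih]
      by_cases h : q ∈ l
      · rw [if_pos h, if_pos (List.mem_cons_of_mem _ h)]
      · rw [if_neg h, PySem.Dict.getD_insert]
        by_cases h2 : q = x
        · rw [if_pos h2, if_pos (by rw [h2]; exact List.mem_cons_self)]
          exact h2.symm
        · rw [if_neg h2, if_neg (by
            intro hc
            rcases List.mem_cons.mp hc with hh | hh
            · exact h2 hh
            · exact h hh)]

lemma parent0D_root {maps : List String} {p : Int × Int} (hp : p ∈ okList maps) :
    IsRootP (parent0D maps) p := by
  show (parent0D maps).getD p p = p
  unfold parent0D
  rw [idFold_getD, if_pos hp]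

lemma UFInv_parent0 (maps : List String) : UFInv maps (parent0D maps) 0 := by
  refine ⟨parent0D_keys maps, ?_, ?_⟩
  · intro p hp
    have := parent0D_root hp
    unfold IsRootP at this
    rw [this]
    exact ⟨hp, Relation.ReflTransGen.refl⟩
  · intro p hp
    exact ⟨0, le_refl _, parent0D_root hp⟩

lemma edgesD_ok (maps : List String) :
    ∀ e ∈ edgesD maps, e.1 ∈ okList maps ∧ (e.2 ∈ okList maps → Adj maps e.1 e.2) := by
  intro e he
  obtain ⟨p, hp, hpe⟩ := List.mem_flatMap.mp he
  have hok1 : okb maps p = true := mem_okList.mp hp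
  rcases List.mem_cons.mp hpe with h | h
  · subst h
    refine ⟨hp, fun h2 => ⟨hok1, mem_okList.mp h2, ?_⟩⟩
    simp [nbrsB]
  · rw [List.mem_singleton] at h
    subst h
    refine ⟨hp, fun h2 => ⟨hok1, mem_okList.mp h2, ?_⟩⟩
    simp [nbrsB]

lemma length_edgesD (maps : List String) :
    (edgesD maps).length = 2 * (okList maps).length := by
  unfold edgesD
  rw [List.length_flatMap]
  have : ∀ p : Int × Int, (edgesOf p).length = 2 := fun p => rfl
  rw [List.map_congr_left (fun p _ => this p), List.map_const', List.sum_replicate]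
  simp [Nat.mul_comm]

lemma parentD_spec (maps : List String) :
    ∃ k, k ≤ 2 * (okList maps).length ∧ UFInv maps (parentD maps) k ∧
    (∀ e ∈ edgesD maps, e.2 ∈ okList maps → RootEqv (parentD maps) e.1 e.2) := by
  have hfuel : 0 + (edgesD maps).length + 1 ≤ ufFuel maps := by
    rw [length_edgesD]
    have := length_okList_le maps
    unfold ufFuel
    omega
  obtain ⟨k, hk, hinv, -, hes⟩ := ufFold maps (edgesD maps) (parent0D maps, size0D maps) 0
    (UFInv_parent0 maps) hfuel (edgesD_ok maps)
  rw [length_edgesD] at hk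
  exact ⟨k, by omega, hinv, hes⟩

lemma rootD_spec (maps : List String) :
    ∀ p ∈ okList maps, RootsTo (parentD maps) p (rootD maps p) ∧
      rootD maps p ∈ okList maps ∧ Conn maps p (rootD maps p) := by
  obtain ⟨k, hk, ⟨-, hC, hR⟩, -⟩ := parentD_spec maps
  intro p hp
  obtain ⟨j, hjle, hjr⟩ := hR p hp
  have hfind : ufFind (parentD maps) (ufFuel maps) p = iterP (parentD maps) j p := by
    apply ufFind_eq_of_iter j p _ _ rfl hjr
    have := length_okList_le maps
    unfold ufFuel
    omega
  have hiter := iterP_ok hC j p hp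
  unfold rootD
  rw [hfind]
  exact ⟨⟨j, rfl, hjr⟩, hiter.1, hiter.2⟩

lemma rootD_eq_of_rootsTo {maps : List String} {p r : Int × Int} (hp : p ∈ okList maps)
    (h : RootsTo (parentD maps) p r) : rootD maps p = r :=
  rootsTo_unique ((rootD_spec maps p hp).1) h

lemma rootD_adj {maps : List String} {p q : Int × Int} (h : Adj maps p q) :
    rootD maps p = rootD maps q := by
  obtain ⟨hpok, hqok, hnb⟩ := h
  have hp : p ∈ okList maps := mem_okList.mpr hpok
  have hq : q ∈ okList maps := mem_okList.mpr hqok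
  obtain ⟨-, -, -, hes⟩ := parentD_spec maps
  have hcase : ((p, q) ∈ edgesD maps) ∨ ((q, p) ∈ edgesD maps) := by
    rcases p with ⟨a, b⟩; rcases q with ⟨c, d⟩
    simp only [nbrsB, List.mem_cons, List.not_mem_nil, or_false, Prod.mk.injEq] at hnb
    rcases hnb with ⟨h1, h2⟩ | ⟨h1, h2⟩ | ⟨h1, h2⟩ | ⟨h1, h2⟩
    · refine Or.inl (List.mem_flatMap.mpr ⟨(a, b), hp, ?_⟩)
      have he : (((a, b) : Int × Int), ((c, d) : Int × Int)) = ((a, b), (a + 1, b)) := by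
        simp only [Prod.mk.injEq]
        exact ⟨trivial, by omega, by omega⟩
      rw [he]
      exact List.mem_cons_self
    · refine Or.inr (List.mem_flatMap.mpr ⟨(c, d), hq, ?_⟩)
      have he : (((c, d) : Int × Int), ((a, b) : Int × Int)) = ((c, d), (c + 1, d)) := by
        simp only [Prod.mk.injEq]
        exact ⟨trivial, by omega, by omega⟩
      rw [he]
      exact List.mem_cons_self
    · refine Or.inl (List.mem_flatMap.mpr ⟨(a, b), hp, ?_⟩)
      have he : (((a, b) : Int × Int), ((c, d) : Int × Int)) = ((a, b), (a, b + 1)) := by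
        simp only [Prod.mk.injEq]
        exact ⟨trivial, by omega, by omega⟩
      rw [he]
      exact List.mem_cons_of_mem _ List.mem_cons_self
    · refine Or.inr (List.mem_flatMap.mpr ⟨(c, d), hq, ?_⟩)
      have he : (((c, d) : Int × Int), ((a, b) : Int × Int)) = ((c, d), (c, d + 1)) := by
        simp only [Prod.mk.injEq]
        exact ⟨trivial, by omega, by omega⟩
      rw [he]
      exact List.mem_cons_of_mem _ List.mem_cons_self
  rcases hcase with hmem | hmem
  · obtain ⟨r, h1, h2⟩ := hes (p, q) hmem hq
    rw [rootD_eq_of_rootsTo hp h1, rootD_eq_of_rootsTo hq h2]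
  · obtain ⟨r, h1, h2⟩ := hes (q, p) hmem hp
    rw [rootD_eq_of_rootsTo hp h2, rootD_eq_of_rootsTo hq h1]

lemma rootD_eq_iff {maps : List String} {p q : Int × Int}
    (hp : okb maps p = true) (hq : okb maps q = true) :
    rootD maps p = rootD maps q ↔ Conn maps p q := by
  constructor
  · intro h
    have h1 := (rootD_spec maps p (mem_okList.mpr hp)).2.2
    have h2 := (rootD_spec maps q (mem_okList.mpr hq)).2.2
    rw [h] at h1
    exact conn_trans h1 (conn_symm h2)
  · intro h
    induction h with
    | refl => rfl
    | tail h1 h2 ih => rw [ih h2.1, rootD_adj h2]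


-- ============ grouping the letters by root ============

lemma ofList_append_singleton {α : Type} [BEq α] (l : List α) (a : α) :
    PySem.Set.ofList (l ++ [a]) = PySem.Set.add (PySem.Set.ofList l) a := by
  rw [PySem.Set.ofList_eq_foldl, List.foldl_append, ← PySem.Set.ofList_eq_foldl]
  rfl

lemma groupFold_spec (maps : List String) (xs : List (Int × Int))
    (k : (Int × Int) → (Int × Int)) (v : (Int × Int) → Char) :
    (xs.foldl (fun co x => co.insert (k x) (co.getD (k x) [] ++ [v x]))
        PySem.Dict.empty).keys = PySem.Set.ofList (xs.map k) ∧
    ∀ r, (xs.foldl (fun co x => co.insert (k x) (co.getD (k x) [] ++ [v x]))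
        PySem.Dict.empty).getD r [] = (xs.filter (fun x => k x == r)).map v := by
  induction xs using List.reverseRecOn with
  | nil => exact ⟨rfl, fun r => rfl⟩
  | append_singleton ys x ih =>
      obtain ⟨ihk, ihv⟩ := ih
      rw [List.foldl_append]
      simp only [List.foldl_cons, List.foldl_nil]
      set g := ys.foldl (fun co x => co.insert (k x) (co.getD (k x) [] ++ [v x]))
        PySem.Dict.empty with hg
      constructor
      · rw [List.map_append, List.map_cons, List.map_nil, ofList_append_singleton]
        by_cases hc : g.contains (k x) = true
        · rw [PySem.Dict.keys_insert_of_contains _ _ hc, ihk]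
          have hmem : k x ∈ PySem.Set.ofList (ys.map k) := by
            rw [← ihk]
            exact (PySem.Dict.contains_iff_mem_keys g (k x)).mp hc
          unfold PySem.Set.add
          rw [if_pos (by rw [PySem.Set.contains_iff]; exact hmem)]
        · have hc' : g.contains (k x) = false := by
            cases h : g.contains (k x)
            · rfl
            · exact absurd h hc
          rw [PySem.Dict.keys_insert_of_not_contains _ _ hc', ihk]
          have hmem : k x ∉ PySem.Set.ofList (ys.map k) := by
            rw [← ihk]
            intro h
            exact hc ((PySem.Dict.contains_iff_mem_keys g (k x)).mpr h)
          unfold PySem.Set.add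
          rw [if_neg (by rw [PySem.Set.contains_iff]; exact hmem)]
      · intro r
        rw [PySem.Dict.getD_insert, List.filter_append, List.map_append]
        by_cases h : r = k x
        · rw [if_pos h, ihv, h]
          have : List.filter (fun y => k y == k x) [x] = [x] := by
            simp
          rw [this]
          rfl
        · rw [if_neg h, ihv]
          have : List.filter (fun y => k y == r) [x] = [] := by
            have hbeq : (k x == r) = false := by
              rw [beq_eq_false_iff_ne]
              exact fun hc => h hc.symm
            simp [List.filter, hbeq]
          rw [this]
          simp

-- Source B's per-component war body (the exact lambda of the port of B)
def warBody (ans : PySem.Dict Char Int) (letters : List Char) : PySem.Dict Char Int :=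
  let cnt : PySem.Dict Char Int := PySem.Dict.counter letters
  let top : Int := (PySem.List.max? cnt.values (fun v => v)).getD 0
  let winner : Char :=
    (PySem.List.max? (cnt.keys.filter (fun c => cnt.getD c 0 == top)) (fun c => c)).getD ' '
  cnt.items.foldl (fun a cv =>
    if cv.2 < top then
      let a1 := a.insert winner (a.getD winner 0 + cv.2)
      a1.insert cv.1 (a1.getD cv.1 0 - cv.2)
    else a) ans

def compsD (maps : List String) : PySem.Dict (Int × Int) (List Char) :=
  (okList maps).foldl (fun co c =>
    co.insert (rootD maps c) (co.getD (rootD maps c) [] ++ [pvChar maps c.1 c.2]))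
    PySem.Dict.empty

noncomputable def lettersOf (maps : List String) (s : Int × Int) : List Char :=
  ((scanPairs maps).filter (fun q => decide (q ∈ compF maps s))).map
    (fun q => pvChar maps q.1 q.2)

noncomputable def freshRec (maps : List String) :
    List (Int × Int) → Finset (Int × Int) → List (Int × Int)
  | [], _ => []
  | s :: L, U =>
      if okb maps s = true ∧ s ∉ U then s :: freshRec maps L (U ∪ compF maps s)
      else freshRec maps L U

lemma freshRec_ok (maps : List String) :
    ∀ (L : List (Int × Int)) (U : Finset (Int × Int)),
    ∀ s ∈ freshRec maps L U, okb maps s = true := by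
  intro L
  induction L with
  | nil => intro U s hs; exact absurd hs (List.not_mem_nil)
  | cons x L ih =>
      intro U s hs
      by_cases h : okb maps x = true ∧ x ∉ U
      · rw [freshRec, if_pos h] at hs
        rcases List.mem_cons.mp hs with h2 | h2
        · subst h2; exact h.1
        · exact ih _ s h2
      · rw [freshRec, if_neg h] at hs
        exact ih _ s hs

lemma lettersD_eq {maps : List String} {s : Int × Int} (hs : okb maps s = true) :
    ((okList maps).filter (fun c => rootD maps c == rootD maps s)).map
      (fun c => pvChar maps c.1 c.2) = lettersOf maps s := by
  unfold lettersOf okList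
  rw [List.filter_filter]
  congr 1
  apply List.filter_congr
  intro q hq
  by_cases hok : okb maps q = true
  · by_cases hconn : Conn maps s q
    · have h1 : rootD maps q = rootD maps s :=
        (rootD_eq_iff hok hs).mpr (conn_symm hconn)
      have h2 : q ∈ compF maps s := mem_compF.mpr ⟨hok, hconn⟩
      simp [h1, hok, h2]
    · have h1 : rootD maps q ≠ rootD maps s := by
        intro hc
        exact hconn (conn_symm ((rootD_eq_iff hok hs).mp hc))
      have h2 : q ∉ compF maps s := fun hc => hconn (mem_compF.mp hc).2
      simp [h1, hok, h2]
  · have h2 : q ∉ compF maps s := fun hc => hok (mem_compF.mp hc).1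
    simp [hok, h2]

lemma freshRoots (maps : List String) :
    ∀ (L : List (Int × Int)) (U : Finset (Int × Int)) (S : List (Int × Int)),
    (∀ x, okb maps x = true → (x ∈ U ↔ rootD maps x ∈ S)) →
    PySem.Set.update S ((L.filter (fun p => okb maps p)).map (rootD maps)) =
      S ++ (freshRec maps L U).map (rootD maps) := by
  intro L
  induction L with
  | nil => intro U S _; simp [PySem.Set.update, freshRec]
  | cons s L ih =>
      intro U S hinv
      by_cases hok : okb maps s = true
      · rw [List.filter_cons_of_pos hok, List.map_cons]
        have hupd : PySem.Set.update S (rootD maps s ::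
            (L.filter (fun p => okb maps p)).map (rootD maps)) =
            PySem.Set.update (PySem.Set.add S (rootD maps s))
              ((L.filter (fun p => okb maps p)).map (rootD maps)) := rfl
        rw [hupd]
        by_cases hU : s ∈ U
        · have hrS : rootD maps s ∈ S := (hinv s hok).mp hU
          have hadd : PySem.Set.add S (rootD maps s) = S := by
            unfold PySem.Set.add
            rw [if_pos (by rw [PySem.Set.contains_iff]; exact hrS)]
          rw [hadd, freshRec, if_neg (fun h => h.2 hU)]
          exact ih U S hinv
        · have hrS : rootD maps s ∉ S := fun h => hU ((hinv s hok).mpr h)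
          have hadd : PySem.Set.add S (rootD maps s) = S ++ [rootD maps s] := by
            unfold PySem.Set.add
            rw [if_neg (by rw [PySem.Set.contains_iff]; exact hrS)]
          rw [hadd, freshRec, if_pos ⟨hok, hU⟩]
          have hinv' : ∀ x, okb maps x = true →
              (x ∈ U ∪ compF maps s ↔ rootD maps x ∈ S ++ [rootD maps s]) := by
            intro x hx
            rw [Finset.mem_union, List.mem_append, List.mem_singleton]
            constructor
            · rintro (h | h)
              · exact Or.inl ((hinv x hx).mp h)
              · refine Or.inr ?_
                exact (rootD_eq_iff hx hok).mpr (conn_symm (mem_compF.mp h).2)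
            · rintro (h | h)
              · exact Or.inl ((hinv x hx).mpr h)
              · refine Or.inr (mem_compF.mpr ⟨hx, ?_⟩)
                exact conn_symm ((rootD_eq_iff hx hok).mp h)
          rw [ih (U ∪ compF maps s) (S ++ [rootD maps s]) hinv']
          rw [List.map_cons, List.append_assoc]
          rfl
      · rw [List.filter_cons_of_neg hok, freshRec, if_neg (fun h => hok h.1)]
        exact ih U S hinv

lemma compsD_keys (maps : List String) :
    (compsD maps).keys = (freshRec maps (scanPairs maps) ∅).map (rootD maps) := by
  unfold compsD
  rw [(groupFold_spec maps (okList maps) (rootD maps) (fun c => pvChar maps c.1 c.2)).1]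
  have h0 : ∀ x, okb maps x = true →
      (x ∈ (∅ : Finset (Int × Int)) ↔ rootD maps x ∈ ([] : List (Int × Int))) := by
    intro x _
    constructor
    · intro h; exact absurd h (Finset.notMem_empty x)
    · intro h; exact absurd h (List.not_mem_nil)
  have h1 := freshRoots maps (scanPairs maps) ∅ [] h0
  rw [PySem.Set.update_nil_left, List.nil_append] at h1
  exact h1

lemma compsD_keys_nodup (maps : List String) : (compsD maps).keys.Nodup := by
  unfold compsD
  rw [(groupFold_spec maps (okList maps) (rootD maps) (fun c => pvChar maps c.1 c.2)).1]
  exact PySem.Set.nodup_ofList _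

lemma compsD_values (maps : List String) :
    (compsD maps).values = (freshRec maps (scanPairs maps) ∅).map (lettersOf maps) := by
  rw [PySem.Dict.values_eq_map_keys _ (compsD_keys_nodup maps) [], compsD_keys, List.map_map]
  apply List.map_congr_left
  intro s hs
  have hok := freshRec_ok maps (scanPairs maps) ∅ s hs
  show (compsD maps).getD (rootD maps s) [] = lettersOf maps s
  unfold compsD
  rw [(groupFold_spec maps (okList maps) (rootD maps) (fun c => pvChar maps c.1 c.2)).2]
  exact lettersD_eq hok


-- ============ bridging the port of B to the staged definitions ============

lemma parent0_port_eq (maps : List String) : altParent0 maps = parent0D maps := by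
  have h2 : altParent0 maps = (scanPairs maps).foldl (fun par (p : Int × Int) =>
      if pvChar maps p.1 p.2 ≠ '.' then par.insert p p else par) PySem.Dict.empty :=
    nested_fold_eq maps ((fun par (p : Int × Int) =>
      if pvChar maps p.1 p.2 ≠ '.' then par.insert p p else par) :
      PySem.Dict (Int × Int) (Int × Int) → (Int × Int) →
        PySem.Dict (Int × Int) (Int × Int)) PySem.Dict.empty
  have h3 : (scanPairs maps).foldl (fun par (p : Int × Int) =>
      if pvChar maps p.1 p.2 ≠ '.' then par.insert p p else par) PySem.Dict.empty =
      ((scanPairs maps).filter (fun p : Int × Int =>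
        decide (pvChar maps p.1 p.2 ≠ '.'))).foldl
        (fun par (p : Int × Int) => par.insert p p) PySem.Dict.empty :=
    PySem.List.foldl_ite_eq_foldl_filter _ _ _ _
  rw [h2, h3]
  unfold parent0D okList
  congr 1
  apply List.filter_congr
  intro p hp
  have hb := mem_scanPairs.mp hp
  simp only [okb]
  by_cases h : pvChar maps p.1 p.2 ≠ '.'
  · rw [decide_eq_true h, decide_eq_true ⟨hb.1, hb.2.1, hb.2.2.1, hb.2.2.2, h⟩]
  · rw [decide_eq_false h, decide_eq_false (fun hc => h hc.2.2.2.2)]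

lemma size0_port_eq (maps : List String) : altSize0 maps = size0D maps := by
  unfold altSize0 size0D
  rw [parent0_port_eq, parent0D_keys]

lemma parent_port_eq (maps : List String) : altParent maps = parentD maps := by
  unfold altParent altUF parentD edgesD
  rw [foldl_flatMap, parent0_port_eq, size0_port_eq, parent0D_keys]
  rfl

lemma comps_port_eq (maps : List String) : altComps maps = compsD maps := by
  unfold altComps compsD
  rw [parent_port_eq]
  obtain ⟨k, -, ⟨hkeys, -, -⟩, -⟩ := parentD_spec maps
  rw [hkeys]
  rfl

lemma solution_alt_eq_flat (maps : List String) :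
    solution_alt maps =
      (PySem.List.max? (((compsD maps).values.foldl warBody (seedB maps)).values)
        (fun v => v)).getD 0 := by
  unfold solution_alt
  rw [comps_port_eq, show altAns0 maps = seedB maps from seedB_nested maps]
  rfl


-- ============ counters of a component's letters ============

lemma card_filter_letter (cells : List (Int × Int)) (hnd : cells.Nodup)
    (g : (Int × Int) → Char) (c : Char) :
    (((cells.toFinset.filter (fun p => g p = c)).card : Int)) = (((cells.map g).count c : Nat) : Int) := by
  have h1 : (cells.map g).count c = cells.countP (fun p => g p == c) := by
    simp only [List.count, List.countP_map]
    rfl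
  have h3 : cells.toFinset.filter (fun p => g p = c) = (cells.filter (fun p => g p == c)).toFinset := by
    apply Finset.ext
    intro a
    simp only [Finset.mem_filter, List.mem_toFinset, List.mem_filter, beq_iff_eq]
  have h4 : (cells.toFinset.filter (fun p => g p = c)).card = (cells.map g).count c := by
    rw [h3, List.card_toFinset, List.Nodup.dedup (List.Nodup.filter _ hnd), h1,
      List.countP_eq_length_filter]
  exact_mod_cast h4

lemma compCells_toFinset {maps : List String} (s : Int × Int) :
    ((scanPairs maps).filter (fun q => decide (q ∈ compF maps s))).toFinset =
      compF maps s := by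
  apply Finset.ext
  intro q
  rw [List.mem_toFinset, List.mem_filter, decide_eq_true_eq]
  constructor
  · rintro ⟨-, h⟩; exact h
  · intro h
    have hok := (mem_compF.mp h).1
    have hb := okb_bounds hok
    exact ⟨mem_scanPairs.mpr ⟨hb.1.1, hb.1.2, hb.2.1, hb.2.2⟩, h⟩

lemma lettersOf_count {maps : List String} (s : Int × Int) (c : Char) :
    (((lettersOf maps s).count c : Nat) : Int) =
      (((compF maps s).filter (fun p => pvChar maps p.1 p.2 = c)).card : Int) := by
  unfold lettersOf
  rw [← card_filter_letter _ ((nodup_scanPairs maps).filter _)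
    (fun q => pvChar maps q.1 q.2) c, compCells_toFinset]

lemma lettersOf_mem {maps : List String} (s : Int × Int) (c : Char) :
    c ∈ lettersOf maps s ↔ ∃ p ∈ compF maps s, pvChar maps p.1 p.2 = c := by
  unfold lettersOf
  rw [List.mem_map]
  constructor
  · rintro ⟨q, hq, hqc⟩
    obtain ⟨-, h2⟩ := List.mem_filter.mp hq
    exact ⟨q, of_decide_eq_true h2, hqc⟩
  · rintro ⟨q, hq, hqc⟩
    refine ⟨q, ?_, hqc⟩
    have hok := (mem_compF.mp hq).1
    have hb := okb_bounds hok
    exact List.mem_filter.mpr ⟨mem_scanPairs.mpr ⟨hb.1.1, hb.1.2, hb.2.1, hb.2.2⟩,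
      decide_eq_true hq⟩

-- ============ A's scan over all cells ============

def bodyA (maps : List String) (st : PySem.Dict Char Int × List (List Bool)) (p : Int × Int) :
    PySem.Dict Char Int × List (List Bool) :=
  if pvChar maps p.1 p.2 ≠ '.' ∧ vGet st.2 p.1 p.2 = false then
    let visit1 := vSet st.2 p.1 p.2 true
    let r := bfsA maps ((pvN maps).toNat * (pvM maps).toNat + 1) [(p.1, p.2)] visit1
      (PySem.Dict.empty.insert (pvChar maps p.1 p.2) 1)
    (warA st.1 r.1, r.2)
  else st

lemma solution_eq_flat (maps : List String) :
    solution maps = (PySem.List.max? ((scanPairs maps).foldl (bodyA maps)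
      (seedB maps, List.replicate (pvN maps).toNat
        (List.replicate (pvM maps).toNat false))).1.values (fun v => v)).getD 0 := by
  rw [← nested_fold_eq maps (bodyA maps), ← seedA_nested maps]
  rfl

noncomputable def warStep (maps : List String) (d : PySem.Dict Char Int) (s : Int × Int) :
    PySem.Dict Char Int :=
  warBody d (lettersOf maps s)

lemma scanA (maps : List String) :
    ∀ (L : List (Int × Int)) (stA : PySem.Dict Char Int × List (List Bool))
      (U : Finset (Int × Int)),
    (∀ p ∈ L, 0 ≤ p.1 ∧ p.1 < pvN maps ∧ 0 ≤ p.2 ∧ p.2 < pvM maps) →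
    VRel maps stA.2 U → Shape maps stA.2 → ClosedF maps U → U ⊆ okCells maps →
    stA.1.keys.Nodup → (∀ p : Int × Int, okb maps p = true → pvChar maps p.1 p.2 ∈ stA.1.keys) →
    (L.foldl (bodyA maps) stA).1 = (freshRec maps L U).foldl (warStep maps) stA.1 := by
  intro L
  induction L with
  | nil => intro stA U _ _ _ _ _ _ _; rfl
  | cons p L ih =>
      intro stA U hb hVR hSh hUcl hUok hKnd hK2
      have hpb := hb p List.mem_cons_self
      simp only [List.foldl_cons]
      by_cases hch : pvChar maps p.1 p.2 ≠ '.'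
      case neg =>
        have hokf : ¬ okb maps p = true := by
          simp only [okb, decide_eq_true_eq]
          intro hc
          exact hch hc.2.2.2.2
        have hstep : bodyA maps stA p = stA := by
          unfold bodyA
          rw [if_neg (fun hc => hch hc.1)]
        rw [hstep, freshRec, if_neg (fun hc => hokf hc.1)]
        exact ih stA U (fun q hq => hb q (List.mem_cons_of_mem _ hq)) hVR hSh hUcl hUok hKnd hK2
      case pos =>
      have hok : okb maps p = true := by
        simp only [okb, decide_eq_true_eq]
        exact ⟨hpb.1, hpb.2.1, hpb.2.2.1, hpb.2.2.2, hch⟩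
      by_cases hmem : p ∈ U
      · have hvA : vGet stA.2 p.1 p.2 = true := (hVR p hok).mpr hmem
        have hstep : bodyA maps stA p = stA := by
          unfold bodyA
          rw [if_neg (fun hc => by rw [hvA] at hc; simp at hc)]
        rw [hstep, freshRec, if_neg (fun hc => hc.2 hmem)]
        exact ih stA U (fun q hq => hb q (List.mem_cons_of_mem _ hq)) hVR hSh hUcl hUok hKnd hK2
      · -- fresh component rooted at p
        have hvA : vGet stA.2 p.1 p.2 = false := by
          cases hv : vGet stA.2 p.1 p.2
          · rfl
          · exact absurd ((hVR p hok).mp hv) hmem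
        set C := compF maps p with hCdef
        have hsC : p ∈ C := self_mem_compF hok
        have hCok : ∀ q ∈ C, okb maps q = true := fun q hq => (mem_compF.mp hq).1
        have hCU : ∀ q ∈ C, q ∉ U := compF_disjoint hUcl hmem
        have hCcl : ClosedF maps C := closedF_compF
        have hCmin : ∀ T : Finset (Int × Int), p ∈ T → ClosedF maps T → C ⊆ T :=
          fun T h1 h2 => compF_min h1 h2
        have hW0ok : insert p U ⊆ okCells maps := by
          intro a ha
          rcases Finset.mem_insert.mp ha with h | h
          · subst h; exact mem_okCells.mpr hok
          · exact hUok h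
        have hWU : insert p U \ U = {p} := by
          rw [Finset.insert_sdiff_of_notMem _ hmem, Finset.sdiff_self]
          rfl
        have hpack0 : PackA maps U C p [(p.1, p.2)]
            (vSet stA.2 p.1 p.2 true) (PySem.Dict.empty.insert (pvChar maps p.1 p.2) 1)
            (insert p U) := by
          refine ⟨?_, shape_vSet hSh ⟨hpb.1, hpb.2.1⟩ ⟨hpb.2.2.1, hpb.2.2.2⟩ true,
            Finset.mem_insert_self _ _, Finset.subset_insert _ _, ?_, hW0ok, ?_, ?_, ?_, ?_⟩
          · intro q hqok
            have hbq := okb_bounds hqok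
            rw [vGet_vSet hSh ⟨hpb.1, hpb.2.1⟩ ⟨hpb.2.2.1, hpb.2.2.2⟩ hbq.1 hbq.2 true]
            by_cases hqe : q.1 = p.1 ∧ q.2 = p.2
            · have : q = p := Prod.ext hqe.1 hqe.2
              subst this
              rw [if_pos hqe]
              simp
            · rw [if_neg hqe]
              have hne : q ≠ p := by
                intro h; subst h; exact hqe ⟨rfl, rfl⟩
              rw [hVR q hqok]
              constructor
              · exact fun h => Finset.mem_insert_of_mem h
              · intro h
                rcases Finset.mem_insert.mp h with h | h
                · exact absurd h hne
                · exact h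
          · intro a ha
            rcases Finset.mem_insert.mp ha with h | h
            · subst h; exact Finset.mem_union_right _ hsC
            · exact Finset.mem_union_left _ h
          · intro a ha
            rw [List.mem_singleton] at ha
            subst ha
            exact ⟨Finset.mem_insert_self _ _, hsC⟩
          · rw [PySem.Dict.keys_insert_of_not_contains _ _ (PySem.Dict.contains_empty _),
              PySem.Dict.keys_empty]
            exact List.nodup_singleton _
          · intro c
            rw [PySem.Dict.keys_insert_of_not_contains _ _ (PySem.Dict.contains_empty _),
              PySem.Dict.keys_empty, hWU]
            simp only [List.nil_append, List.mem_singleton, Finset.mem_singleton]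
            constructor
            · intro h
              exact ⟨p, rfl, h.symm⟩
            · rintro ⟨a, ha, hac⟩
              subst ha
              exact hac.symm
          · intro c
            rw [hWU, PySem.Dict.getD_insert, Finset.filter_singleton]
            by_cases hce : c = pvChar maps p.1 p.2
            · rw [if_pos hce, if_pos hce.symm, Finset.card_singleton]
              rfl
            · rw [if_neg hce, if_neg (fun h => hce h.symm), Finset.card_empty,
                PySem.Dict.getD_empty]
              rfl
        have hsemi0 : ∀ q ∈ insert p U, q ∉ [(p.1, p.2)] →
            ∀ q' ∈ nbrsB q, okb maps q' = true → q' ∈ insert p U := by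
          intro q hq hqd q' hq' hq'ok
          have hqU : q ∈ U := by
            rcases Finset.mem_insert.mp hq with h | h
            · exact absurd (by rw [h]; exact List.mem_singleton.mpr rfl) hqd
            · exact h
          exact Finset.mem_insert_of_mem (hUcl q hqU q' hq' hq'ok)
        have hfuel0 : ([((p.1 : Int), (p.2 : Int))].length) +
            ((okCells maps).card - (insert p U).card) <
            (pvN maps).toNat * (pvM maps).toNat + 1 := by
          have h1 : (insert p U).card ≤ (okCells maps).card :=
            Finset.card_le_card hW0ok
          have h2 : 0 < (insert p U).card :=
            Finset.card_pos.mpr ⟨p, Finset.mem_insert_self _ _⟩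
          have h3 := card_okCells_le maps
          simp only [List.length_singleton]
          omega
        have hbfs := bfsA_spec (closedRel_of_closedF hCcl) hCU hCmin
          ((pvN maps).toNat * (pvM maps).toNat + 1) [(p.1, p.2)]
          (vSet stA.2 p.1 p.2 true) (PySem.Dict.empty.insert (pvChar maps p.1 p.2) 1)
          (insert p U) hpack0 hsemi0 hfuel0
        obtain ⟨hbVR, hbSh, hbknd, hbkeys, hbcnt⟩ := hbfs
        set co := (bfsA maps ((pvN maps).toNat * (pvM maps).toNat + 1) [(p.1, p.2)]
          (vSet stA.2 p.1 p.2 true) (PySem.Dict.empty.insert (pvChar maps p.1 p.2) 1)).1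
          with hcodef
        set cnt := PySem.Dict.counter (lettersOf maps p) with hcntdef
        have hkeq : ∀ c, c ∈ co.keys ↔ c ∈ cnt.keys := by
          intro c
          rw [hbkeys c, hcntdef, PySem.Dict.keys_counter, PySem.Set.mem_ofList,
            lettersOf_mem]
        have hveq : ∀ c, co.getD c 0 = cnt.getD c 0 := by
          intro c
          rw [hbcnt c, hcntdef, PySem.Dict.getD_counter, lettersOf_count]
        have hcne : co.keys ≠ [] :=
          List.ne_nil_of_mem ((hbkeys (pvChar maps p.1 p.2)).mpr ⟨p, hsC, rfl⟩)
        have hsubk : ∀ c ∈ co.keys, c ∈ stA.1.keys := by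
          intro c hc
          obtain ⟨q, hqC, hqc⟩ := (hbkeys c).mp hc
          rw [← hqc]
          exact hK2 q (hCok q hqC)
        have hwar := war_eq stA.1 co cnt
          ((PySem.List.max? cnt.values (fun v => v)).getD 0)
          ((PySem.List.max? (cnt.keys.filter (fun c => cnt.getD c 0 ==
            (PySem.List.max? cnt.values (fun v => v)).getD 0)) (fun c => c)).getD ' ')
          hKnd hbknd (PySem.Dict.nodup_keys_counter _) hkeq hveq hcne hsubk rfl rfl
        have hAeq : bodyA maps stA p = (warA stA.1 co,
            (bfsA maps ((pvN maps).toNat * (pvM maps).toNat + 1) [(p.1, p.2)]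
              (vSet stA.2 p.1 p.2 true) (PySem.Dict.empty.insert (pvChar maps p.1 p.2) 1)).2) := by
          unfold bodyA
          rw [if_pos ⟨hch, hvA⟩]
        have hwarStep : warStep maps stA.1 p = warA stA.1 co := by
          unfold warStep warBody
          rw [← hcntdef]
          exact hwar.1.symm
        rw [hAeq, freshRec, if_pos ⟨hok, hmem⟩]
        simp only [List.foldl_cons]
        have hknd' : (warA stA.1 co).keys.Nodup := by rw [hwar.2]; exact hKnd
        have hk2' : ∀ q : Int × Int, okb maps q = true →
            pvChar maps q.1 q.2 ∈ (warA stA.1 co).keys := by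
          intro q hq
          rw [hwar.2]
          exact hK2 q hq
        have hrec := ih (warA stA.1 co,
            (bfsA maps ((pvN maps).toNat * (pvM maps).toNat + 1) [(p.1, p.2)]
              (vSet stA.2 p.1 p.2 true) (PySem.Dict.empty.insert (pvChar maps p.1 p.2) 1)).2)
          (U ∪ C) (fun q hq => hb q (List.mem_cons_of_mem _ hq)) hbVR hbSh
          (closedF_union hUcl hCcl) (Finset.union_subset hUok compF_subset_ok) hknd' hk2'
        rw [hrec, hwarStep]

-- ===== VERDICT (by name: the statement is the Claim_ definition above) =====
theorem solution_spec : Claim_equal_solution := by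
  unfold Claim_equal_solution
  intro maps _ _
  unfold Spec_solution
  rw [solution_eq_flat, solution_alt_eq_flat]
  have hA := scanA maps (scanPairs maps)
    (seedB maps, List.replicate (pvN maps).toNat (List.replicate (pvM maps).toNat false)) ∅
    (fun p hp => mem_scanPairs.mp hp) (vrel_visit0 maps) (shape_visit0 maps)
    (fun a ha q _ _ => absurd ha (Finset.notMem_empty a)) (Finset.empty_subset _)
    (seedB_keys_nodup maps) (fun p h => seedB_keys_mem h)
  rw [hA, compsD_values, List.foldl_map]
  rfl
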